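-- pv_equiv track=rewrite | github.com/thisishwan2/Algorithm | programmers/PCCP/석유 시추.py | solution
-- ===== SOURCE A (Python) =====
-- from collections import deque
-- from collections import deque
-- from collections import deque
-- from collections import deque
--
-- def solution(land):
--     answer = 0
--
--     visited = [[0 for _ in range(len(land[0]))] for _ in range(len(land))]
--     dic = {}
--     idx = 1
--
--     for i in range(len(land)):
--         for j in range(len(land[0])):
--             if land[i][j] == 1 and visited[i][j] == 0:
--                 cnt = bfs(i, j, land, visited, idx)
--                 dic[idx] = cnt
--                 idx += 1
--     ans = []
--     for j in range(len(land[0])):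
--         tmp = list(dic.keys())
--         val = 0
--         for i in range(len(land)):
--             if visited[i][j] in tmp:
--                 val += dic.get(visited[i][j])
--                 tmp.remove(visited[i][j])
--         ans.append(val)
--
--     return max(ans)
--
-- dx = [-1, 1, 0, 0]
--
-- dy = [0, 0, -1, 1]
--
-- def bfs(x, y, land, visited, idx):
--     q = deque()
--     q.append([x, y])
--     visited[x][y] = idx
--     cnt = 1
--
--     while q:
--         x, y = q.popleft()
--         for i in range(4):
--             nx = x + dx[i]
--             ny = y + dy[i]
--
--             if 0 <= nx < len(land) and 0 <= ny < len(land[0]):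
--                 if visited[nx][ny] == 0 and land[nx][ny] == 1:
--                     q.append([nx, ny])
--                     visited[nx][ny] = idx
--                     cnt += 1
--     return cnt
-- ===== SOURCE B (Python) =====
-- from collections import Counter
--
-- def solution(land):
--     h, w = len(land), len(land[0])
--     # Give every oil cell a unique positive id, then repeatedly lower each cell's
--     # label to the minimum over itself and its oil neighbours until stable:
--     # each component ends up labelled by the smallest id it contains.
--     m = [[i * w + j + 1 if land[i][j] == 1 else 0 for j in range(w)] for i in range(h)]
--     while True:
--         nxt = [[min([m[i][j]]
--                     + [m[x][y] for x, y in ((i - 1, j), (i + 1, j), (i, j - 1), (i, j + 1))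
--                        if 0 <= x < h and 0 <= y < w and land[x][y] == 1])
--                 if land[i][j] == 1 else 0
--                 for j in range(w)] for i in range(h)]
--         if nxt == m:
--             break
--         m = nxt
--     sizes = Counter(x for row in m for x in row)
--     vals = []
--     for j in range(w):
--         labels = {m[i][j] for i in range(h)} - {0}
--         vals.append(sum(sizes[l] for l in labels))
--     return max(vals)
-- ===== Notes on version B (the rewrite author's own statement) =====
-- stated objective: alternative
-- what changed: B replaces A's sequential per-seed BFS (deque, mutable visited matrix, per-component counters, dict of sizes, per-column key-list remove scans) by iterative min-label propagation: every oil cell starts with a unique id, whole-grid sweeps lower each cell to the minimum of itself and its oil neighbours until a fixpoint, so each component is labelled by its smallest id; sizes are read off one Counter and each column sums the sizes of its distinct labels.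
import Mathlib
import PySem

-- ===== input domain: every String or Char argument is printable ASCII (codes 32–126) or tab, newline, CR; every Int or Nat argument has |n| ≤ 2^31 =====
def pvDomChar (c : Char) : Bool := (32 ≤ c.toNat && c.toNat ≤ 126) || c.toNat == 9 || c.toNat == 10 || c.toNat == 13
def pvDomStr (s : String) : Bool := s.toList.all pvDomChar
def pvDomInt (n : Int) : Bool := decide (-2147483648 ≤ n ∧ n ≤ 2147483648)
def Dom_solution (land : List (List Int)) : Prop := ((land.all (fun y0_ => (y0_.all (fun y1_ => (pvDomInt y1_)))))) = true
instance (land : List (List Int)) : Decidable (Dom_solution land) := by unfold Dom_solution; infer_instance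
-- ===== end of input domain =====

-- B replaces A's sequential per-seed BFS labelling (deque, per-component counters, dict of sizes,
-- per-column key-list remove scans) by iterative min-label propagation to a fixpoint: every oil cell
-- starts with a unique positive id, whole-grid sweeps lower each cell to the minimum over itself and
-- its oil neighbours until stable, so each component is labelled by its smallest id; sizes are read
-- off one Counter and each column sums the sizes of its distinct labels (objective: alternative).
-- Python A's helper `bfs` mutates the `visited` list it is given (a local of `solution`, not an
-- argument of `solution` itself); the port threads the updated matrix explicitly.

-- ===== shared indexing primitives (matrix[x][y] read / write) =====
def pvGet2 (v : List (List Int)) (x y : Int) : Int :=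
  PySem.List.pyGetD (PySem.List.pyGetD v x []) y 0

def pvSet2 (v : List (List Int)) (x y c : Int) : List (List Int) :=
  PySem.List.pySetD v x (PySem.List.pySetD (PySem.List.pyGetD v x []) y c)

-- number of cells of `v` holding value `c` (used only by totality guards and the proofs)
def pvCount (v : List (List Int)) (c : Int) : Nat := v.flatten.count c

-- ===== PORT A =====
def pvDx : List Int := [-1, 1, 0, 0]
def pvDy : List Int := [0, 0, -1, 1]

-- body of A's `for i in range(4)` neighbour loop, state = (visited, q, cnt)
def pvStepA (land : List (List Int)) (idx x y : Int)
    (s : List (List Int) × List (Int × Int) × Int) (i : Int) :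
    List (List Int) × List (Int × Int) × Int :=
  let nx := x + PySem.List.pyGetD pvDx i 0
  let ny := y + PySem.List.pyGetD pvDy i 0
  if 0 ≤ nx ∧ nx < PySem.List.len land ∧ 0 ≤ ny ∧ ny < PySem.List.len (PySem.List.pyGetD land 0 []) then
    if pvGet2 s.1 nx ny = 0 ∧ pvGet2 land nx ny = 1 then
      (pvSet2 s.1 nx ny idx, s.2.1 ++ [(nx, ny)], s.2.2 + 1)
    else s
  else s

-- A's `while q:` loop; the dependent if is a totality guard only: in every state the Python
-- reaches it holds (each marked cell turns a 0-entry into idx ≠ 0), proved in the lemmas below.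
def pvBfsLoop (land : List (List Int)) (idx : Int) :
    List (List Int) → List (Int × Int) → Int → List (List Int) × Int
  | v, [], cnt => (v, cnt)
  | v, (x, y) :: rest, cnt =>
    let s := (PySem.List.pyRange 0 4 1).foldl (pvStepA land idx x y) (v, rest, cnt)
    if h : pvCount s.1 0 < pvCount v 0 ∨ (s.1 = v ∧ s.2.1.length ≤ rest.length) then
      pvBfsLoop land idx s.1 s.2.1 s.2.2
    else (s.1, s.2.2)
termination_by v q _ => (pvCount v 0, q.length)
decreasing_by
  rcases h with h | ⟨h1, h2⟩
  · exact Prod.Lex.left _ _ h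
  · rw [h1]; exact Prod.Lex.right _ (Nat.lt_succ_of_le h2)

-- A's `bfs(x, y, land, visited, idx)`: returns (mutated visited, cnt)
def pvBfs (x y : Int) (land visited : List (List Int)) (idx : Int) :
    List (List Int) × Int :=
  pvBfsLoop land idx (pvSet2 visited x y idx) [(x, y)] 1

-- body of A's labelling double loop, state = (visited, dic, idx)
def pvInnerA (land : List (List Int)) (i : Int)
    (st : List (List Int) × PySem.Dict Int Int × Int) (j : Int) :
    List (List Int) × PySem.Dict Int Int × Int :=
  if pvGet2 land i j = 1 ∧ pvGet2 st.1 i j = 0 then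
    let r := pvBfs i j land st.1 st.2.2
    (r.1, PySem.Dict.insert st.2.1 st.2.2 r.2, st.2.2 + 1)
  else st

-- body of A's per-column row loop, state = (tmp, val)
def pvColA (d : PySem.Dict Int Int) (tv : List Int × Int) (lbl : Int) : List Int × Int :=
  if tv.1.contains lbl then
    ((PySem.List.remove? tv.1 lbl).getD tv.1, tv.2 + (PySem.Dict.get? d lbl).getD 0)
  else tv

def solution (land : List (List Int)) : Int :=
  let h := PySem.List.len land
  let w := PySem.List.len (PySem.List.pyGetD land 0 [])
  let visited0 := (PySem.List.pyRange 0 h 1).map (fun _ => (PySem.List.pyRange 0 w 1).map (fun _ => (0 : Int)))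
  let st := (PySem.List.pyRange 0 h 1).foldl (fun st i =>
      (PySem.List.pyRange 0 w 1).foldl (pvInnerA land i) st) (visited0, (PySem.Dict.empty : PySem.Dict Int Int), (1 : Int))
  let ans := (PySem.List.pyRange 0 w 1).foldl (fun ans j =>
      let inner := (PySem.List.pyRange 0 h 1).foldl (fun tv i => pvColA st.2.1 tv (pvGet2 st.1 i j))
        (PySem.Dict.keys st.2.1, (0 : Int))
      ans ++ [inner.2]) ([] : List Int)
  -- max(ans): ans is nonempty on Pre_ (w ≥ 1), the default is never read there
  (PySem.List.max? ans (fun v => v)).getD 0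

-- ===== PORT B =====
-- the four neighbours (i-1,j),(i+1,j),(i,j-1),(i,j+1) of Source B
def pvNbrs (x y : Int) : List (Int × Int) := [(x - 1, y), (x + 1, y), (x, y - 1), (x, y + 1)]

-- initial labels: a unique positive id per oil cell, 0 elsewhere
def pvInit (land : List (List Int)) (h w : Int) : List (List Int) :=
  (PySem.List.pyRange 0 h 1).map (fun i =>
    (PySem.List.pyRange 0 w 1).map (fun j =>
      if pvGet2 land i j = 1 then i * w + j + 1 else 0))

-- one whole-grid sweep: each oil cell drops to the min over itself and its in-bounds oil neighbours
def pvSweep (land : List (List Int)) (h w : Int) (m : List (List Int)) : List (List Int) :=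
  (PySem.List.pyRange 0 h 1).map (fun i =>
    (PySem.List.pyRange 0 w 1).map (fun j =>
      if pvGet2 land i j = 1 then
        (PySem.List.min? (pvGet2 m i j ::
            ((pvNbrs i j).filter (fun c =>
              decide (0 ≤ c.1 ∧ c.1 < h ∧ 0 ≤ c.2 ∧ c.2 < w ∧ pvGet2 land c.1 c.2 = 1))).map
              (fun c => pvGet2 m c.1 c.2)) (fun v => v)).getD 0
      else 0))

-- total number of label mass used as the totality guard of the while loop
def pvSumNat (m : List (List Int)) : Nat := (m.flatten.map Int.toNat).sum

-- Source B's `while True:` loop; the dependent if is a totality guard only: on the matrices the Python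
-- builds a changed sweep strictly lowers the (nonnegative) label sum, proved in the lemmas below.
def pvPropLoop (land : List (List Int)) (h w : Int) : List (List Int) → List (List Int)
  | m =>
    let n := pvSweep land h w m
    if n = m then m
    else if _hd : pvSumNat n < pvSumNat m then pvPropLoop land h w n else m
termination_by m => pvSumNat m

def solution_alt (land : List (List Int)) : Int :=
  let h := PySem.List.len land
  let w := PySem.List.len (PySem.List.pyGetD land 0 [])
  let m := pvPropLoop land h w (pvInit land h w)
  let sizes := PySem.Dict.counter m.flatten
  let vals := (PySem.List.pyRange 0 w 1).foldl (fun vals j =>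
      let labels := PySem.Set.diff
        (PySem.Set.ofList ((PySem.List.pyRange 0 h 1).map (fun i => pvGet2 m i j)))
        (PySem.Set.ofList [(0 : Int)])
      vals ++ [(labels.map (fun l => PySem.Dict.getD sizes l 0)).sum]) ([] : List Int)
  (PySem.List.max? vals (fun v => v)).getD 0

-- ===== PRECONDITION & SPEC =====
-- Pre_ excludes exactly the inputs where Python A raises: empty land / empty first row
-- (IndexError on land[0] resp. ValueError on max([])), and grids where some row is shorter
-- than the first row (IndexError on land[i][j]).
def Pre_solution (land : List (List Int)) : Prop :=
  land ≠ [] ∧ 0 < (PySem.List.pyGetD land 0 []).length ∧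
    ∀ r ∈ land, (PySem.List.pyGetD land 0 []).length ≤ r.length
instance (land : List (List Int)) : Decidable (Pre_solution land) := by
  unfold Pre_solution; infer_instance

def pvWitness_solution : List (List Int) := [[1, 0], [0, 1]]

def Spec_solution (land : List (List Int)) (out : Int) : Prop := out = solution_alt land
instance (land : List (List Int)) (out : Int) : Decidable (Spec_solution land out) := by
  unfold Spec_solution; infer_instance

-- ===== CLAIM (what is proved, stated in full; the proofs are below) =====
def Claim_equal_solution : Prop :=
  ∀ (land : List (List Int)), Dom_solution land → Pre_solution land →
    Spec_solution land (solution land)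

-- ===== LEMMAS AND PROOFS =====

-- ===== proof-only definitions: the flood-fill intermediate program pvMid =====
-- body of the frontier flood fill's neighbour loop, state = (visited, nxt)
def pvStepB (land : List (List Int)) (lbl : Int)
    (s : List (List Int) × List (Int × Int)) (c : Int × Int) :
    List (List Int) × List (Int × Int) :=
  if 0 ≤ c.1 ∧ c.1 < PySem.List.len land ∧ 0 ≤ c.2 ∧ c.2 < PySem.List.len (PySem.List.pyGetD land 0 []) ∧
      pvGet2 s.1 c.1 c.2 = 0 ∧ pvGet2 land c.1 c.2 = 1 then
    (pvSet2 s.1 c.1 c.2 lbl, s.2 ++ [c])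
  else s

-- frontier-round flood fill loop (proof intermediate between A's BFS and B's propagation)
def pvFillLoop (land : List (List Int)) (lbl : Int) :
    List (List Int) → List (Int × Int) → List (List Int)
  | v, f =>
    if f.isEmpty then v
    else
      let s := f.foldl (fun s xy => (pvNbrs xy.1 xy.2).foldl (pvStepB land lbl) s)
        (v, ([] : List (Int × Int)))
      if _h : pvCount s.1 0 < pvCount v 0 then pvFillLoop land lbl s.1 s.2
      else s.1
termination_by v _ => pvCount v 0

def pvFill (i j : Int) (land visited : List (List Int)) (lbl : Int) : List (List Int) :=
  pvFillLoop land lbl (pvSet2 visited i j lbl) [(i, j)]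

-- body of the flood-fill labelling double loop, state = (visited, label)
def pvInnerB (land : List (List Int)) (i : Int)
    (st : List (List Int) × Int) (j : Int) : List (List Int) × Int :=
  if pvGet2 land i j = 1 ∧ pvGet2 st.1 i j = 0 then
    (pvFill i j land st.1 (st.2 + 1), st.2 + 1)
  else st

-- the intermediate program: flood-fill labelling + Counter + per-column distinct sums
def pvMid (land : List (List Int)) : Int :=
  let h := PySem.List.len land
  let w := PySem.List.len (PySem.List.pyGetD land 0 [])
  let st := (PySem.List.pyRange 0 h 1).foldl (fun st i =>
      (PySem.List.pyRange 0 w 1).foldl (pvInnerB land i) st)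
      (((PySem.List.pyRange 0 h 1).map (fun _ => PySem.List.pyRepeat [(0 : Int)] w)), (0 : Int))
  let sizes := PySem.Dict.counter st.1.flatten
  let vals := (PySem.List.pyRange 0 w 1).foldl (fun vals j =>
      let labels := PySem.Set.ofList ((PySem.List.pyRange 0 h 1).map (fun i => pvGet2 st.1 i j))
      vals ++ [((labels.filter (fun l => l != 0)).map (fun l => PySem.Dict.getD sizes l 0)).sum])
      ([] : List Int)
  (PySem.List.max? vals (fun v => v)).getD 0

def pvW (land : List (List Int)) : Nat := (PySem.List.pyGetD land 0 []).length

def pvDims (land v : List (List Int)) : Prop :=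
  v.length = land.length ∧ ∀ r ∈ v, r.length = pvW land

-- ===== stage 1: A equals the flood-fill intermediate pvMid (lockstep simulation) =====
lemma count_set_row (r : List Int) (k : Nat) (c m : Int) (hk : k < r.length) :
    (r.set k c).count m + [r[k]].count m = r.count m + [c].count m := by
  rw [List.set_eq_take_cons_drop c hk]
  conv_rhs => rw [← List.take_append_drop k r, ← List.getElem_cons_drop hk]
  simp only [List.count_append, List.count_cons, List.count_nil]
  split_ifs <;> omega

lemma count_set_mat (v : List (List Int)) (n : Nat) (r : List Int) (m : Int)
    (hn : n < v.length) :
    ((v.set n r).flatten).count m + (v[n]).count m = v.flatten.count m + r.count m := by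
  rw [List.set_eq_take_cons_drop r hn]
  conv_rhs => rw [← List.take_append_drop n v, ← List.getElem_cons_drop hn]
  simp only [List.flatten_append, List.flatten_cons, List.count_append]
  omega

lemma pyGetD_row (v : List (List Int)) (x : Int) (hx : 0 ≤ x) (hx2 : x.toNat < v.length) :
    PySem.List.pyGetD v x [] = v[x.toNat] :=
  PySem.List.pyGetD_eq_getElem v [] hx (by omega)

lemma dims_set2 (land v : List (List Int)) (x y c : Int) (hx : 0 ≤ x)
    (hD : pvDims land v) : pvDims land (pvSet2 v x y c) := by
  unfold pvSet2
  rw [PySem.List.pySetD_of_nonneg _ _ hx]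
  by_cases hx2 : x.toNat < v.length
  · refine ⟨by simp [hD.1], ?_⟩
    intro r hr
    rcases List.mem_or_eq_of_mem_set hr with h | h
    · exact hD.2 r h
    · subst h
      rw [PySem.List.length_pySetD, pyGetD_row v x hx hx2]
      exact hD.2 _ (List.getElem_mem hx2)
  · rw [List.set_eq_of_length_le (by omega)]
    exact hD

-- cell (x,y) in bounds and 0, overwritten by c: effect on all value counts at once
lemma set2_count (v : List (List Int)) (x y c : Int) (hx : 0 ≤ x) (hx2 : x.toNat < v.length)
    (hy : 0 ≤ y) (hy2 : y.toNat < (v[x.toNat]).length) (h0 : pvGet2 v x y = 0) (m : Int) :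
    pvCount (pvSet2 v x y c) m + (if m = 0 then 1 else 0) =
      pvCount v m + (if m = c then 1 else 0) := by
  unfold pvSet2 pvCount
  rw [PySem.List.pySetD_of_nonneg _ _ hx, pyGetD_row v x hx hx2,
    PySem.List.pySetD_of_nonneg _ _ hy]
  unfold pvGet2 at h0
  rw [pyGetD_row v x hx hx2, PySem.List.pyGetD_eq_getElem _ _ hy (by omega)] at h0
  have h1 := count_set_mat v x.toNat ((v[x.toNat]).set y.toNat c) m hx2
  have h2 := count_set_row (v[x.toNat]) y.toNat c m hy2
  rw [h0] at h2
  have cnt1 : ∀ a : Int, List.count m [a] = if m = a then 1 else 0 := by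
    intro a; rcases eq_or_ne m a with h | h
    · simp [h]
    · rw [List.count_eq_zero.mpr (by simp [h]), if_neg h]
  rw [cnt1, cnt1] at h2
  split_ifs at * <;> omega

-- an in-bounds read lies in the matrix entries
lemma get2_mem (land v : List (List Int)) (i j : Int) (hD : pvDims land v)
    (hi : 0 ≤ i) (hi2 : i < (land.length : Int)) (hj : 0 ≤ j) (hj2 : j < (pvW land : Int)) :
    pvGet2 v i j ∈ v.flatten := by
  unfold pvGet2
  have hv := hD.1
  have hrow : PySem.List.pyGetD v i [] ∈ v := by
    refine PySem.List.pyGetD_mem _ _ ?_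
    unfold PySem.Raise.InRange
    omega
  refine List.mem_flatten.mpr ⟨_, hrow, PySem.List.pyGetD_mem _ _ ?_⟩
  have := hD.2 _ hrow
  unfold PySem.Raise.InRange
  omega

-- analysis of one neighbour step of the fill: it appends δ (empty or [c]) and marks accordingly
lemma stepB_an (land : List (List Int)) (lbl : Int) (v : List (List Int)) (c : Int × Int)
    (hD : pvDims land v) :
    ∃ V δ, (∀ q, pvStepB land lbl (v, q) c = (V, q ++ δ)) ∧ pvDims land V ∧
      (∀ m, pvCount V m + (if m = 0 then δ.length else 0) =
        pvCount v m + (if m = lbl then δ.length else 0)) ∧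
      (δ = [] → V = v) := by
  unfold pvStepB
  by_cases hc : 0 ≤ c.1 ∧ c.1 < PySem.List.len land ∧ 0 ≤ c.2 ∧
      c.2 < PySem.List.len (PySem.List.pyGetD land 0 []) ∧ pvGet2 v c.1 c.2 = 0 ∧
      pvGet2 land c.1 c.2 = 1
  · refine ⟨pvSet2 v c.1 c.2 lbl, [c], fun q => by rw [if_pos hc],
      dims_set2 _ _ _ _ _ hc.1 hD, ?_, by simp⟩
    obtain ⟨h1, h2, h3, h4, h5, h6⟩ := hc
    rw [PySem.List.len_eq] at h2
    rw [PySem.List.len_eq] at h4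
    intro m
    have hd1 := hD.1
    have hx2 : c.1.toNat < v.length := by omega
    have hy2 : c.2.toNat < (v[c.1.toNat]).length := by
      have := hD.2 _ (List.getElem_mem hx2)
      unfold pvW at this
      omega
    simpa using set2_count v c.1 c.2 lbl h1 hx2 h3 hy2 h5 m
  · exact ⟨v, [], fun q => by rw [if_neg hc]; simp, hD, by simp, fun _ => rfl⟩

-- the same analysis for a fold of fill steps over any cell list
lemma cellsB_an (land : List (List Int)) (lbl : Int) :
    ∀ (cells : List (Int × Int)) (v : List (List Int)), pvDims land v →
    ∃ V δ, (∀ q, cells.foldl (pvStepB land lbl) (v, q) = (V, q ++ δ)) ∧ pvDims land V ∧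
      (∀ m, pvCount V m + (if m = 0 then δ.length else 0) =
        pvCount v m + (if m = lbl then δ.length else 0)) ∧
      (δ = [] → V = v) := by
  intro cells
  induction cells with
  | nil => exact fun v hD => ⟨v, [], fun q => by simp, hD, by simp, fun _ => rfl⟩
  | cons c cells ih =>
    intro v hD
    obtain ⟨V1, δ1, h1, hD1, hc1, he1⟩ := stepB_an land lbl v c hD
    obtain ⟨V2, δ2, h2, hD2, hc2, he2⟩ := ih V1 hD1
    refine ⟨V2, δ1 ++ δ2, ?_, hD2, ?_, ?_⟩
    · intro q
      rw [List.foldl_cons, h1 q, h2 (q ++ δ1), List.append_assoc]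
    · intro m
      have a1 := hc1 m
      have a2 := hc2 m
      rw [List.length_append]
      split_ifs at a1 a2 ⊢ <;> omega
    · intro h
      rcases List.append_eq_nil_iff.mp h with ⟨e1, e2⟩
      rw [he2 e2, he1 e1]

-- the same analysis for a whole frontier round of the fill
lemma roundB_an (land : List (List Int)) (lbl : Int) :
    ∀ (f : List (Int × Int)) (v : List (List Int)), pvDims land v →
    ∃ V δ, (∀ q, f.foldl (fun s xy => (pvNbrs xy.1 xy.2).foldl (pvStepB land lbl) s) (v, q) = (V, q ++ δ)) ∧
      pvDims land V ∧
      (∀ m, pvCount V m + (if m = 0 then δ.length else 0) =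
        pvCount v m + (if m = lbl then δ.length else 0)) ∧
      (δ = [] → V = v) := by
  intro f
  induction f with
  | nil => exact fun v hD => ⟨v, [], fun q => by simp, hD, by simp, fun _ => rfl⟩
  | cons c f ih =>
    intro v hD
    obtain ⟨V1, δ1, h1, hD1, hc1, he1⟩ := cellsB_an land lbl (pvNbrs c.1 c.2) v hD
    obtain ⟨V2, δ2, h2, hD2, hc2, he2⟩ := ih V1 hD1
    refine ⟨V2, δ1 ++ δ2, ?_, hD2, ?_, ?_⟩
    · intro q
      rw [List.foldl_cons, h1 q, h2 (q ++ δ1), List.append_assoc]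
    · intro m
      have a1 := hc1 m
      have a2 := hc2 m
      rw [List.length_append]
      split_ifs at a1 a2 ⊢ <;> omega
    · intro h
      rcases List.append_eq_nil_iff.mp h with ⟨e1, e2⟩
      rw [he2 e2, he1 e1]

-- one A-step (direction i, read off dx/dy) is one fill-step at the corresponding neighbour,
-- with cnt kept equal to k + queue length
lemma stepAB (land : List (List Int)) (idx x y i : Int) (c : Int × Int)
    (hdx : x + PySem.List.pyGetD pvDx i 0 = c.1)
    (hdy : y + PySem.List.pyGetD pvDy i 0 = c.2) :
    ∀ (v : List (List Int)) (q : List (Int × Int)) (k : Int),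
    pvStepA land idx x y (v, q, k + (q.length : Int)) i =
      ((pvStepB land idx (v, q) c).1, (pvStepB land idx (v, q) c).2,
        k + ((pvStepB land idx (v, q) c).2.length : Int)) := by
  intro v q k
  simp only [pvStepA, pvStepB, hdx, hdy]
  by_cases hP : 0 ≤ c.1 ∧ c.1 < PySem.List.len land ∧ 0 ≤ c.2 ∧
      c.2 < PySem.List.len (PySem.List.pyGetD land 0 [])
  · by_cases hQ : pvGet2 v c.1 c.2 = 0 ∧ pvGet2 land c.1 c.2 = 1
    · rw [if_pos hP, if_pos hQ, if_pos ⟨hP.1, hP.2.1, hP.2.2.1, hP.2.2.2, hQ.1, hQ.2⟩]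
      simp only [List.length_append, List.length_singleton]
      push_cast
      ring_nf
    · rw [if_pos hP, if_neg hQ, if_neg (by tauto)]
  · rw [if_neg hP, if_neg (by tauto)]

-- A's `for i in range(4)` expansion of one popped cell IS the fill's neighbour fold
lemma expandAB (land : List (List Int)) (idx x y : Int)
    (v : List (List Int)) (q : List (Int × Int)) (k : Int) :
    (PySem.List.pyRange 0 4 1).foldl (pvStepA land idx x y) (v, q, k + (q.length : Int)) =
      (((pvNbrs x y).foldl (pvStepB land idx) (v, q)).1,
       ((pvNbrs x y).foldl (pvStepB land idx) (v, q)).2,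
       k + ((((pvNbrs x y).foldl (pvStepB land idx) (v, q)).2).length : Int)) := by
  have hr : PySem.List.pyRange 0 4 1 = [0, 1, 2, 3] := by decide
  rw [hr]
  simp only [pvNbrs, List.foldl_cons, List.foldl_nil]
  rw [stepAB land idx x y 0 (x - 1, y)
        (by rw [show PySem.List.pyGetD pvDx 0 0 = -1 from by decide]; ring)
        (by rw [show PySem.List.pyGetD pvDy 0 0 = 0 from by decide]; ring) v q k,
      stepAB land idx x y 1 (x + 1, y)
        (by rw [show PySem.List.pyGetD pvDx 1 0 = 1 from by decide])
        (by rw [show PySem.List.pyGetD pvDy 1 0 = 0 from by decide]; ring),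
      stepAB land idx x y 2 (x, y - 1)
        (by rw [show PySem.List.pyGetD pvDx 2 0 = 0 from by decide]; ring)
        (by rw [show PySem.List.pyGetD pvDy 2 0 = -1 from by decide]; ring),
      stepAB land idx x y 3 (x, y + 1)
        (by rw [show PySem.List.pyGetD pvDx 3 0 = 0 from by decide]; ring)
        (by rw [show PySem.List.pyGetD pvDy 3 0 = 1 from by decide])]

-- popping a whole frontier f off A's queue is one frontier round of the fill
lemma bfsLoop_round (land : List (List Int)) (idx : Int) (hidx : idx ≠ 0) :
    ∀ (f : List (Int × Int)) (v : List (List Int)) (g : List (Int × Int)) (k : Int),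
    pvDims land v →
    pvBfsLoop land idx v (f ++ g) (k + ((f ++ g).length : Int)) =
      pvBfsLoop land idx
        (f.foldl (fun s xy => (pvNbrs xy.1 xy.2).foldl (pvStepB land idx) s) (v, g)).1
        (f.foldl (fun s xy => (pvNbrs xy.1 xy.2).foldl (pvStepB land idx) s) (v, g)).2
        ((k + (f.length : Int)) +
          (((f.foldl (fun s xy => (pvNbrs xy.1 xy.2).foldl (pvStepB land idx) s) (v, g)).2).length : Int)) := by
  intro f
  induction f with
  | nil =>
    intro v g k hD
    simp only [List.nil_append, List.foldl_nil, List.length_nil, Int.natCast_zero]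
    norm_num
  | cons c f ih =>
    obtain ⟨x, y⟩ := c
    intro v g k hD
    rw [List.cons_append]
    rw [show k + ((((x, y) :: (f ++ g)).length : Nat) : Int) =
      (k + 1) + (((f ++ g).length : Nat) : Int) from by push_cast [List.length_cons]; ring]
    rw [pvBfsLoop]
    rw [expandAB land idx x y v (f ++ g) (k + 1)]
    obtain ⟨V1, δ, hT, hD1, hcnt, hnil⟩ := cellsB_an land idx (pvNbrs x y) v hD
    rw [hT (f ++ g)]
    have hguard : pvCount V1 0 < pvCount v 0 ∨
        (V1 = v ∧ ((f ++ g) ++ δ).length ≤ (f ++ g).length) := by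
      rcases eq_or_ne δ [] with hd | hd
      · exact Or.inr ⟨hnil hd, by simp [hd]⟩
      · left
        have := hcnt 0
        rw [if_pos rfl, if_neg (Ne.symm hidx)] at this
        have := List.length_pos_iff.mpr hd
        omega
    rw [dif_pos hguard]
    rw [List.append_assoc]
    rw [ih V1 (g ++ δ) (k + 1) hD1]
    simp only [List.foldl_cons]
    rw [hT g]
    congr 1
    push_cast [List.length_cons]
    ring

-- A's whole BFS loop equals the frontier-round fill loop; cnt counts exactly the cells marked
lemma bfs_eq_fill (land : List (List Int)) (idx : Int) (hidx : idx ≠ 0) :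
    ∀ (N : Nat) (v : List (List Int)) (f : List (Int × Int)) (cnt : Int),
    pvCount v 0 ≤ N → pvDims land v →
    pvBfsLoop land idx v f cnt =
      (pvFillLoop land idx v f,
        cnt + ((pvCount v 0 - pvCount (pvFillLoop land idx v f) 0 : Nat) : Int)) ∧
      pvDims land (pvFillLoop land idx v f) ∧
      (∀ m, pvCount (pvFillLoop land idx v f) m +
          (if m = 0 then pvCount v 0 - pvCount (pvFillLoop land idx v f) 0 else 0) =
        pvCount v m + (if m = idx then pvCount v 0 - pvCount (pvFillLoop land idx v f) 0 else 0)) ∧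
      pvCount (pvFillLoop land idx v f) 0 ≤ pvCount v 0 := by
  intro N
  induction N using Nat.strong_induction_on with
  | _ N ih =>
    intro v f cnt h0 hD
    rcases f with _ | ⟨c, f'⟩
    · rw [pvBfsLoop, pvFillLoop]
      refine ⟨by simp, hD, by simp, le_rfl⟩
    · have hrd := bfsLoop_round land idx hidx (c :: f') v []
        (cnt - (((c :: f').length : Nat) : Int)) hD
      simp only [List.append_nil] at hrd
      rw [show cnt - (((c :: f').length : Nat) : Int) + (((c :: f').length : Nat) : Int) = cnt
        from by ring] at hrd
      obtain ⟨V1, δ, hT, hD1, hcnt, hnil⟩ := roundB_an land idx (c :: f') v hD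
      rw [hT []] at hrd
      simp only [List.nil_append] at hrd
      rw [pvFillLoop]
      rw [if_neg (by simp)]
      rw [hT []]
      simp only [List.nil_append]
      have hc0 : pvCount V1 0 + δ.length = pvCount v 0 := by
        have := hcnt 0
        rwa [if_pos rfl, if_neg (Ne.symm hidx)] at this
      rcases eq_or_ne δ [] with hd | hd
      · have hV : V1 = v := hnil hd
        subst hd
        subst hV
        rw [dif_neg (lt_irrefl _)]
        rw [hrd, pvBfsLoop]
        refine ⟨by simp, hD, by simp, le_rfl⟩
      · have hlt : pvCount V1 0 < pvCount v 0 := by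
          have := List.length_pos_iff.mpr hd
          omega
        rw [dif_pos hlt]
        obtain ⟨e1, e2, e3, e4⟩ := ih (pvCount V1 0) (by omega) V1 δ
          (cnt + ((δ.length : Nat) : Int)) le_rfl hD1
        rw [hrd, e1]
        refine ⟨?_, e2, ?_, by omega⟩
        · refine congrArg _ ?_
          have h2 : pvCount (pvFillLoop land idx V1 δ) 0 ≤ pvCount V1 0 := e4
          omega
        · intro m
          have a1 := hcnt m
          have a2 := e3 m
          split_ifs at a1 a2 ⊢ <;> omega

-- one hit of the labelling scan: A's bfs call equals the fill call, cnt is the new label's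
-- multiplicity, and the other value counts are untouched
lemma pvBfs_eq (land v : List (List Int)) (i j idx : Int) (hD : pvDims land v)
    (hidx : 1 ≤ idx) (hi : 0 ≤ i) (hi2 : i < (land.length : Int)) (hj : 0 ≤ j)
    (hj2 : j < (pvW land : Int)) (h0 : pvGet2 v i j = 0) (hfresh : pvCount v idx = 0) :
    pvBfs i j land v idx =
      (pvFill i j land v idx, (pvCount (pvFill i j land v idx) idx : Int)) ∧
    pvDims land (pvFill i j land v idx) ∧
    (∀ m, m ≠ 0 → m ≠ idx → pvCount (pvFill i j land v idx) m = pvCount v m) ∧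
    pvCount (pvFill i j land v idx) 0 ≤ pvCount v 0 := by
  have hD1 : pvDims land (pvSet2 v i j idx) := dims_set2 land v i j idx hi hD
  have hd1 := hD.1
  have hx2 : i.toNat < v.length := by omega
  have hy2 : j.toNat < (v[i.toNat]).length := by
    have := hD.2 _ (List.getElem_mem hx2)
    omega
  have hsc := set2_count v i j idx hi hx2 hj hy2 h0
  obtain ⟨e1, e2, e3, e4⟩ := bfs_eq_fill land idx (by omega)
    (pvCount (pvSet2 v i j idx) 0) (pvSet2 v i j idx) [(i, j)] 1 le_rfl hD1
  have hBfs : pvBfs i j land v idx =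
      pvBfsLoop land idx (pvSet2 v i j idx) [(i, j)] 1 := rfl
  have hFill : pvFill i j land v idx =
      pvFillLoop land idx (pvSet2 v i j idx) [(i, j)] := rfl
  rw [hBfs, hFill, e1]
  rw [← hFill] at e2 e3 e4 ⊢
  have s0 := hsc 0
  have sidx := hsc idx
  have m0 := e3 0
  have midx := e3 idx
  rw [if_pos rfl, if_neg (by omega)] at s0
  rw [if_neg (by omega), if_pos rfl] at sidx
  rw [if_pos rfl, if_neg (by omega)] at m0
  rw [if_neg (by omega), if_pos rfl] at midx
  refine ⟨?_, e2, ?_, by omega⟩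
  · refine congrArg _ ?_
    omega
  · intro m hm0 hmidx
    have a1 := hsc m
    have a2 := e3 m
    rw [if_neg hm0, if_neg hmidx] at a1
    rw [if_neg hm0, if_neg hmidx] at a2
    omega

-- the invariant carried through the labelling scan
def pvInv (land v : List (List Int)) (d : PySem.Dict Int Int) (idx : Int) : Prop :=
  pvDims land v ∧ 1 ≤ idx ∧ d.keys.Nodup ∧ (∀ k ∈ d.keys, 1 ≤ k ∧ k < idx) ∧
  (∀ e ∈ v.flatten, e = 0 ∨ e ∈ d.keys) ∧
  (∀ k ∈ d.keys, PySem.Dict.getD d k 0 = (pvCount v k : Int))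

-- one scan cell: A's body and the fill's body stay in lockstep and preserve the invariant
lemma scan_cell (land v : List (List Int)) (d : PySem.Dict Int Int) (idx i j : Int)
    (hI : pvInv land v d idx) (hi : 0 ≤ i) (hi2 : i < (land.length : Int)) (hj : 0 ≤ j)
    (hj2 : j < (pvW land : Int)) :
    pvInnerB land i (v, idx - 1) j =
      ((pvInnerA land i (v, d, idx) j).1, (pvInnerA land i (v, d, idx) j).2.2 - 1) ∧
    pvInv land (pvInnerA land i (v, d, idx) j).1 (pvInnerA land i (v, d, idx) j).2.1
      (pvInnerA land i (v, d, idx) j).2.2 := by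
  obtain ⟨hD, hidx, hnd, hbnd, hent, hval⟩ := hI
  unfold pvInnerA pvInnerB
  by_cases hc : pvGet2 land i j = 1 ∧ pvGet2 v i j = 0
  · rw [if_pos hc, if_pos hc]
    have hfresh : pvCount v idx = 0 := by
      by_contra hne
      have : idx ∈ v.flatten := List.count_pos_iff.mp (by unfold pvCount at hne; omega)
      rcases hent idx this with h | h
      · omega
      · exact absurd (hbnd idx h).2 (lt_irrefl idx)
    obtain ⟨eB, eD, eM, eC⟩ := pvBfs_eq land v i j idx hD hidx hi hi2 hj hj2 hc.2 hfresh
    simp only [eB, sub_add_cancel, add_sub_cancel_right]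
    refine ⟨trivial, eD, by omega, PySem.Dict.nodup_keys_insert _ _ _ hnd, ?_, ?_, ?_⟩
    · intro k hk
      rcases (PySem.Dict.mem_keys_insert _ _ _ _).mp hk with h | h
      · subst h; omega
      · have := hbnd k h; omega
    · intro e he
      rcases eq_or_ne e 0 with h | h
      · exact Or.inl h
      rcases eq_or_ne e idx with h2 | h2
      · exact Or.inr ((PySem.Dict.mem_keys_insert _ _ _ _).mpr (Or.inl h2))
      right
      refine (PySem.Dict.mem_keys_insert _ _ _ _).mpr (Or.inr ?_)
      have hpos : 0 < pvCount (pvFill i j land v idx) e := List.count_pos_iff.mpr he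
      have : 0 < pvCount v e := by rw [← eM e h h2]; exact hpos
      rcases hent e (List.count_pos_iff.mp this) with h3 | h3
      · exact absurd h3 h
      · exact h3
    · intro k hk
      rcases (PySem.Dict.mem_keys_insert _ _ _ _).mp hk with h | h
      · subst h
        rw [PySem.Dict.getD_insert_self]
      · have hlt := hbnd k h
        rw [PySem.Dict.getD_insert_of_ne _ _ _ (by omega), hval k h,
          eM k (by omega) (by omega)]
  · rw [if_neg hc, if_neg hc]
    exact ⟨rfl, hD, hidx, hnd, hbnd, hent, hval⟩

-- one row of the labelling scan
lemma scan_row (land : List (List Int)) (i : Int) (hi : 0 ≤ i) (hi2 : i < (land.length : Int)) :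
    ∀ (js : List Int) (v : List (List Int)) (d : PySem.Dict Int Int) (idx : Int),
    (∀ j ∈ js, 0 ≤ j ∧ j < (pvW land : Int)) → pvInv land v d idx →
    js.foldl (pvInnerB land i) (v, idx - 1) =
      ((js.foldl (pvInnerA land i) (v, d, idx)).1,
        (js.foldl (pvInnerA land i) (v, d, idx)).2.2 - 1) ∧
    pvInv land (js.foldl (pvInnerA land i) (v, d, idx)).1
      (js.foldl (pvInnerA land i) (v, d, idx)).2.1
      (js.foldl (pvInnerA land i) (v, d, idx)).2.2 := by
  intro js
  induction js with
  | nil => exact fun v d idx _ hI => ⟨rfl, hI⟩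
  | cons j js ih =>
    intro v d idx hb hI
    have hcell := scan_cell land v d idx i j hI hi hi2 (hb j (by simp)).1 (hb j (by simp)).2
    obtain ⟨e, hI2⟩ := ih (pvInnerA land i (v, d, idx) j).1 (pvInnerA land i (v, d, idx) j).2.1
      (pvInnerA land i (v, d, idx) j).2.2 (fun j' hj' => hb j' (by simp [hj'])) hcell.2
    rw [List.foldl_cons, List.foldl_cons, hcell.1]
    exact ⟨e, hI2⟩

-- the whole labelling scan
lemma scan_all (land : List (List Int)) :
    ∀ (is : List Int) (v : List (List Int)) (d : PySem.Dict Int Int) (idx : Int),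
    (∀ i ∈ is, 0 ≤ i ∧ i < (land.length : Int)) → pvInv land v d idx →
    is.foldl (fun st i =>
        (PySem.List.pyRange 0 (PySem.List.len (PySem.List.pyGetD land 0 [])) 1).foldl
          (pvInnerB land i) st) (v, idx - 1) =
      ((is.foldl (fun st i =>
          (PySem.List.pyRange 0 (PySem.List.len (PySem.List.pyGetD land 0 [])) 1).foldl
            (pvInnerA land i) st) (v, d, idx)).1,
        (is.foldl (fun st i =>
          (PySem.List.pyRange 0 (PySem.List.len (PySem.List.pyGetD land 0 [])) 1).foldl
            (pvInnerA land i) st) (v, d, idx)).2.2 - 1) ∧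
    pvInv land
      (is.foldl (fun st i =>
        (PySem.List.pyRange 0 (PySem.List.len (PySem.List.pyGetD land 0 [])) 1).foldl
          (pvInnerA land i) st) (v, d, idx)).1
      (is.foldl (fun st i =>
        (PySem.List.pyRange 0 (PySem.List.len (PySem.List.pyGetD land 0 [])) 1).foldl
          (pvInnerA land i) st) (v, d, idx)).2.1
      (is.foldl (fun st i =>
        (PySem.List.pyRange 0 (PySem.List.len (PySem.List.pyGetD land 0 [])) 1).foldl
          (pvInnerA land i) st) (v, d, idx)).2.2 := by
  intro is
  induction is with
  | nil => exact fun v d idx _ hI => ⟨rfl, hI⟩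
  | cons i is ih =>
    intro v d idx hb hI
    have hrow := scan_row land i (hb i (by simp)).1 (hb i (by simp)).2
      (PySem.List.pyRange 0 (PySem.List.len (PySem.List.pyGetD land 0 [])) 1) v d idx
      (fun j hj => by
        rw [PySem.List.len_eq] at hj
        have := PySem.List.mem_pyRange_one.mp hj
        unfold pvW
        omega)
      hI
    obtain ⟨e, hI2⟩ := ih _ _ _ (fun i' hi' => hb i' (by simp [hi'])) hrow.2
    rw [List.foldl_cons, List.foldl_cons, hrow.1]
    exact ⟨e, hI2⟩

-- A's per-column loop: each still-unused key is added once if it occurs in the column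
lemma colA_sum (d : PySem.Dict Int Int) :
    ∀ (cs tmp : List Int) (val : Int), tmp.Nodup →
    (cs.foldl (pvColA d) (tmp, val)).2 =
      val + ((tmp.filter (fun l => cs.contains l)).map
        (fun l => (PySem.Dict.get? d l).getD 0)).sum := by
  intro cs
  induction cs with
  | nil =>
    intro tmp val hnd
    simp
  | cons x cs ih =>
    intro tmp val hnd
    rw [List.foldl_cons]
    by_cases hx : tmp.contains x
    · have hmem : x ∈ tmp := by simpa using hx
      have hstep : pvColA d (tmp, val) x =
          (tmp.erase x, val + (PySem.Dict.get? d x).getD 0) := by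
        unfold pvColA
        rw [if_pos hx, PySem.List.remove?_eq_some_erase tmp x hmem]
        rfl
      rw [hstep, ih (tmp.erase x) _ (hnd.erase x)]
      have hperm : tmp.Perm (x :: tmp.erase x) := List.perm_cons_erase hmem
      have h1 : ((tmp.filter (fun l => (x :: cs).contains l)).map
            (fun l => (PySem.Dict.get? d l).getD 0)).sum =
          (((x :: tmp.erase x).filter (fun l => (x :: cs).contains l)).map
            (fun l => (PySem.Dict.get? d l).getD 0)).sum :=
        ((hperm.filter _).map _).sum_eq
      rw [h1, List.filter_cons]
      rw [if_pos (by simp)]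
      rw [List.map_cons, List.sum_cons]
      have h2 : (tmp.erase x).filter (fun l => (x :: cs).contains l) =
          (tmp.erase x).filter (fun l => cs.contains l) := by
        refine List.filter_congr ?_
        intro l hl
        have hne : l ≠ x := by
          intro h
          subst h
          exact (hnd.not_mem_erase) hl
        simp [hne]
      rw [h2]
      ring
    · have hstep : pvColA d (tmp, val) x = (tmp, val) := by
        unfold pvColA
        rw [if_neg hx]
      rw [hstep, ih tmp val hnd]
      have h2 : tmp.filter (fun l => (x :: cs).contains l) =
          tmp.filter (fun l => cs.contains l) := by
        refine List.filter_congr ?_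
        intro l hl
        have hne : l ≠ x := by
          intro h
          subst h
          exact hx (by simpa using hl)
        simp [hne]
      rw [h2]

-- A's column value equals the intermediate's column value (under the scan invariant)
lemma col_eq (land v : List (List Int)) (d : PySem.Dict Int Int) (idx : Int)
    (hI : pvInv land v d idx) (j : Int) (hj : 0 ≤ j) (hj2 : j < (pvW land : Int)) :
    ((PySem.List.pyRange 0 (PySem.List.len land) 1).foldl
        (fun tv i => pvColA d tv (pvGet2 v i j)) (PySem.Dict.keys d, (0 : Int))).2 =
      (((PySem.Set.ofList ((PySem.List.pyRange 0 (PySem.List.len land) 1).map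
          (fun i => pvGet2 v i j))).filter (fun l => l != 0)).map
        (fun l => PySem.Dict.getD (PySem.Dict.counter v.flatten) l 0)).sum := by
  obtain ⟨hD, hidx, hnd, hbnd, hent, hval⟩ := hI
  have hfold : (PySem.List.pyRange 0 (PySem.List.len land) 1).foldl
      (fun tv i => pvColA d tv (pvGet2 v i j)) (PySem.Dict.keys d, (0 : Int)) =
      ((PySem.List.pyRange 0 (PySem.List.len land) 1).map (fun i => pvGet2 v i j)).foldl
        (pvColA d) (PySem.Dict.keys d, (0 : Int)) := (List.foldl_map).symm
  rw [hfold, colA_sum d _ _ 0 hnd, zero_add]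
  set cs := (PySem.List.pyRange 0 (PySem.List.len land) 1).map (fun i => pvGet2 v i j) with hcs
  have hmemflat : ∀ e ∈ cs, e ∈ v.flatten := by
    intro e he
    obtain ⟨i, hi, rfl⟩ := List.mem_map.mp he
    rw [PySem.List.len_eq] at hi
    have hb := PySem.List.mem_pyRange_one.mp hi
    exact get2_mem land v i j hD hb.1 hb.2 hj hj2
  have hn1 : (d.keys.filter (fun l => cs.contains l)).Nodup := hnd.filter _
  have hn2 : ((PySem.Set.ofList cs).filter (fun l => l != 0)).Nodup :=
    (PySem.Set.nodup_ofList cs).filter _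
  have hperm : (d.keys.filter (fun l => cs.contains l)).Perm
      ((PySem.Set.ofList cs).filter (fun l => l != 0)) := by
    rw [List.perm_ext_iff_of_nodup hn1 hn2]
    intro l
    simp only [List.mem_filter, PySem.Set.mem_ofList, bne_iff_ne, List.contains_iff_mem]
    constructor
    · rintro ⟨hk, hc⟩
      have := hbnd l hk
      exact ⟨hc, by omega⟩
    · rintro ⟨hc, hne⟩
      refine ⟨?_, hc⟩
      rcases hent l (hmemflat l hc) with h | h
      · exact absurd h hne
      · exact h
  have hmap1 : (d.keys.filter (fun l => cs.contains l)).map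
        (fun l => (PySem.Dict.get? d l).getD 0) =
      (d.keys.filter (fun l => cs.contains l)).map
        (fun l => PySem.Dict.getD (PySem.Dict.counter v.flatten) l 0) := by
    refine List.map_congr_left ?_
    intro l hl
    have hk : l ∈ d.keys := (List.mem_filter.mp hl).1
    rw [PySem.Dict.getD_counter, ← PySem.Dict.getD_eq_get?_getD, hval l hk]
    rfl
  rw [hmap1]
  exact (hperm.map _).sum_eq

-- the initial matrix of zeros: both builds coincide, and it satisfies the invariant
lemma init_eq (land : List (List Int)) :
    (PySem.List.pyRange 0 (PySem.List.len land) 1).map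
        (fun _ => PySem.List.pyRepeat [(0 : Int)] (PySem.List.len (PySem.List.pyGetD land 0 []))) =
      (PySem.List.pyRange 0 (PySem.List.len land) 1).map
        (fun _ => (PySem.List.pyRange 0 (PySem.List.len (PySem.List.pyGetD land 0 [])) 1).map
          (fun _ => (0 : Int))) := by
  refine List.map_congr_left ?_
  intro i _
  rw [PySem.List.pyRepeat_singleton]
  rw [List.map_const']
  rw [PySem.List.length_pyRange_one]
  norm_num

lemma init_inv (land : List (List Int)) :
    pvInv land ((PySem.List.pyRange 0 (PySem.List.len land) 1).map
        (fun _ => (PySem.List.pyRange 0 (PySem.List.len (PySem.List.pyGetD land 0 [])) 1).map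
          (fun _ => (0 : Int))))
      PySem.Dict.empty 1 := by
  refine ⟨⟨?_, ?_⟩, le_refl 1, by simp [PySem.Dict.keys_empty], by simp [PySem.Dict.keys_empty], ?_, by simp [PySem.Dict.keys_empty]⟩
  · rw [List.length_map, PySem.List.length_pyRange_one, PySem.List.len_eq]
    omega
  · intro r hr
    obtain ⟨i, _, rfl⟩ := List.mem_map.mp hr
    rw [List.length_map, PySem.List.length_pyRange_one, PySem.List.len_eq]
    unfold pvW
    omega
  · intro e he
    obtain ⟨r, hr, her⟩ := List.mem_flatten.mp he
    obtain ⟨i, _, rfl⟩ := List.mem_map.mp hr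
    obtain ⟨jj, _, rfl⟩ := List.mem_map.mp her
    exact Or.inl rfl

-- stage-1 conclusion: A's answer equals the intermediate flood-fill program's answer
lemma solution_eq_pvMid (land : List (List Int)) : solution land = pvMid land := by
  simp only [solution, pvMid]
  rw [init_eq land]
  obtain ⟨e, hI⟩ := scan_all land (PySem.List.pyRange 0 (PySem.List.len land) 1)
    ((PySem.List.pyRange 0 (PySem.List.len land) 1).map
      (fun _ => (PySem.List.pyRange 0 (PySem.List.len (PySem.List.pyGetD land 0 [])) 1).map
        (fun _ => (0 : Int))))
    PySem.Dict.empty 1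
    (fun i hi => by
      rw [PySem.List.len_eq] at hi
      exact PySem.List.mem_pyRange_one.mp hi)
    (init_inv land)
  rw [show (1 : Int) - 1 = 0 from by norm_num] at e
  rw [e]
  rw [PySem.List.foldl_append_singleton_eq_map, PySem.List.foldl_append_singleton_eq_map]
  simp only [List.nil_append]
  refine congrArg (fun l => (PySem.List.max? l (fun v => v)).getD 0) ?_
  refine List.map_congr_left ?_
  intro j hj
  rw [PySem.List.len_eq] at hj
  have hb := PySem.List.mem_pyRange_one.mp hj
  have hcol := col_eq land _ _ _ hI j hb.1 (by unfold pvW; omega)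
  exact hcol

-- ===== stage 2: grid graph, connected components =====
def pvInb (land : List (List Int)) (c : Int × Int) : Prop :=
  0 ≤ c.1 ∧ c.1 < (land.length : Int) ∧ 0 ≤ c.2 ∧ c.2 < (pvW land : Int)

def pvGood (land : List (List Int)) (c : Int × Int) : Prop :=
  pvInb land c ∧ pvGet2 land c.1 c.2 = 1

def pvAdj (land : List (List Int)) (c d : Int × Int) : Prop :=
  pvGood land c ∧ pvGood land d ∧ d ∈ pvNbrs c.1 c.2

def pvConn (land : List (List Int)) : (Int × Int) → (Int × Int) → Prop :=
  Relation.ReflTransGen (pvAdj land)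

lemma nbrs_symm (c d : Int × Int) (h : d ∈ pvNbrs c.1 c.2) : c ∈ pvNbrs d.1 d.2 := by
  obtain ⟨x, y⟩ := c
  obtain ⟨a, b⟩ := d
  simp only [pvNbrs, List.mem_cons, List.not_mem_nil, or_false, Prod.mk.injEq] at h ⊢
  rcases h with ⟨h1, h2⟩ | ⟨h1, h2⟩ | ⟨h1, h2⟩ | ⟨h1, h2⟩
  · subst h1; subst h2; omega
  · subst h1; subst h2; omega
  · subst h1; subst h2; omega
  · subst h1; subst h2; omega

lemma adj_symm (land : List (List Int)) {c d : Int × Int} (h : pvAdj land c d) :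
    pvAdj land d c := ⟨h.2.1, h.1, nbrs_symm c d h.2.2⟩

lemma conn_symm (land : List (List Int)) {c d : Int × Int} (h : pvConn land c d) :
    pvConn land d c :=
  Relation.ReflTransGen.symmetric (fun _ _ hx => adj_symm land hx) h

lemma conn_good (land : List (List Int)) {c d : Int × Int} (hc : pvGood land c)
    (h : pvConn land c d) : pvGood land d := by
  induction h with
  | refl => exact hc
  | tail _ hadj ih => exact hadj.2.1

-- what the counting phase needs from a label matrix
def pvLabels (land M : List (List Int)) : Prop :=
  pvDims land M ∧
  (∀ c, pvInb land c → (pvGet2 M c.1 c.2 ≠ 0 ↔ pvGood land c)) ∧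
  (∀ c d, pvInb land c → pvInb land d → pvGet2 M c.1 c.2 = pvGet2 M d.1 d.2 →
    pvGet2 M c.1 c.2 ≠ 0 → pvConn land c d) ∧
  (∀ c d, pvConn land c d → pvGet2 M c.1 c.2 = pvGet2 M d.1 d.2)

-- in-bounds read/write interaction
lemma get2_set2 (land v : List (List Int)) (x y a b c : Int) (hD : pvDims land v)
    (hx : 0 ≤ x) (hx2 : x < (land.length : Int)) (hy : 0 ≤ y) (hy2 : y < (pvW land : Int))
    (ha : 0 ≤ a) (ha2 : a < (land.length : Int)) (hb : 0 ≤ b) (hb2 : b < (pvW land : Int)) :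
    pvGet2 (pvSet2 v x y c) a b = if a = x ∧ b = y then c else pvGet2 v a b := by
  have hD1 := hD.1
  have hxn : x.toNat < v.length := by omega
  have han : a.toNat < v.length := by omega
  have hrowx : (v[x.toNat]).length = pvW land := hD.2 _ (List.getElem_mem hxn)
  have hrowa : (v[a.toNat]).length = pvW land := hD.2 _ (List.getElem_mem han)
  unfold pvSet2
  rw [PySem.List.pySetD_of_nonneg _ _ hx, pyGetD_row v x hx hxn,
    PySem.List.pySetD_of_nonneg _ _ hy]
  unfold pvGet2
  rw [PySem.List.pyGetD_eq_getElem _ _ ha (by rw [List.length_set]; omega)]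
  rw [List.getElem_set]
  by_cases hax : x.toNat = a.toNat
  · have hax' : a = x := by omega
    subst hax'
    rw [if_pos hax]
    rw [PySem.List.pyGetD_eq_getElem _ _ hb (by rw [List.length_set]; omega)]
    rw [List.getElem_set]
    by_cases hby : y.toNat = b.toNat
    · have hby' : b = y := by omega
      rw [if_pos hby, if_pos ⟨rfl, hby'⟩]
    · have hby' : ¬ b = y := by omega
      rw [if_neg hby, if_neg (by tauto), pyGetD_row v a ha han,
        PySem.List.pyGetD_eq_getElem _ _ hb (by omega)]
  · have hax' : ¬ a = x := by omega
    rw [if_neg hax, if_neg (by tauto), pyGetD_row v a ha han,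
      PySem.List.pyGetD_eq_getElem _ _ hb (by omega)]

-- reading a constructed (map over ranges) matrix
lemma get2_build (f : Int → Int → Int) (h w i j : Int) (hi : 0 ≤ i) (hi2 : i < h)
    (hj : 0 ≤ j) (hj2 : j < w) :
    pvGet2 ((PySem.List.pyRange 0 h 1).map (fun i =>
      (PySem.List.pyRange 0 w 1).map (fun j => f i j))) i j = f i j := by
  unfold pvGet2
  rw [PySem.List.pyGetD_map_pyRange_of_nonneg _ _ _ _ hi hi2,
    PySem.List.pyGetD_map_pyRange_of_nonneg _ _ _ _ hj hj2]

lemma dims_build (land : List (List Int)) (f : Int → Int → Int) :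
    pvDims land ((PySem.List.pyRange 0 (PySem.List.len land) 1).map (fun i =>
      (PySem.List.pyRange 0 (PySem.List.len (PySem.List.pyGetD land 0 [])) 1).map
        (fun j => f i j))) := by
  constructor
  · rw [List.length_map, PySem.List.length_pyRange_one, PySem.List.len_eq]
    omega
  · intro r hr
    obtain ⟨i, _, rfl⟩ := List.mem_map.mp hr
    rw [List.length_map, PySem.List.length_pyRange_one, PySem.List.len_eq]
    unfold pvW
    omega

-- neighbours of an in-bounds cell: the fill condition spelled with the graph notions
lemma stepB_cond_iff (land v : List (List Int)) (c : Int × Int) :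
    (0 ≤ c.1 ∧ c.1 < PySem.List.len land ∧ 0 ≤ c.2 ∧
        c.2 < PySem.List.len (PySem.List.pyGetD land 0 []) ∧
        pvGet2 v c.1 c.2 = 0 ∧ pvGet2 land c.1 c.2 = 1) ↔
      (pvGood land c ∧ pvGet2 v c.1 c.2 = 0) := by
  unfold pvGood pvInb pvW
  rw [PySem.List.len_eq, PySem.List.len_eq]
  tauto

-- fill-loop invariants (relative to the pre-fill matrix V0, the seed and the fresh label l)
def pvK1 (land V0 : List (List Int)) (seed : Int × Int) (l : Int) (V : List (List Int)) : Prop :=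
  ∀ c, pvInb land c → pvGet2 V c.1 c.2 = pvGet2 V0 c.1 c.2 ∨
    (pvGet2 V c.1 c.2 = l ∧ pvConn land seed c)

def pvClosed (land : List (List Int)) (l : Int) (V : List (List Int)) (c : Int × Int) : Prop :=
  ∀ d, pvAdj land c d → pvGet2 V d.1 d.2 = l

-- processing a list of neighbours of one frontier cell x
lemma fill_cell (land V0 : List (List Int)) (seed : Int × Int) (l : Int)
    (hGood : pvGood land seed) (hComp0 : ∀ c, pvConn land seed c → pvGet2 V0 c.1 c.2 = 0)
    (hl : l ≠ 0) (x : Int × Int) (hx : pvConn land seed x) :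
    ∀ (ds : List (Int × Int)), (∀ d ∈ ds, d ∈ pvNbrs x.1 x.2) →
    ∀ (V : List (List Int)) (acc : List (Int × Int)),
    pvDims land V → pvK1 land V0 seed l V →
    (∀ c ∈ acc, pvInb land c ∧ pvGet2 V c.1 c.2 = l) →
    pvDims land (ds.foldl (pvStepB land l) (V, acc)).1 ∧
    pvK1 land V0 seed l (ds.foldl (pvStepB land l) (V, acc)).1 ∧
    (∀ c ∈ (ds.foldl (pvStepB land l) (V, acc)).2,
      pvInb land c ∧ pvGet2 (ds.foldl (pvStepB land l) (V, acc)).1 c.1 c.2 = l) ∧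
    (∀ c, pvInb land c → pvGet2 V c.1 c.2 ≠ 0 →
      pvGet2 (ds.foldl (pvStepB land l) (V, acc)).1 c.1 c.2 = pvGet2 V c.1 c.2) ∧
    (∀ c, pvInb land c → pvGet2 (ds.foldl (pvStepB land l) (V, acc)).1 c.1 c.2 = l →
      pvGet2 V c.1 c.2 = l ∨ c ∈ (ds.foldl (pvStepB land l) (V, acc)).2) ∧
    (∀ c ∈ acc, c ∈ (ds.foldl (pvStepB land l) (V, acc)).2) ∧
    (∀ d ∈ ds, pvAdj land x d → pvGet2 (ds.foldl (pvStepB land l) (V, acc)).1 d.1 d.2 = l) := by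
  intro ds
  induction ds with
  | nil =>
    intro _ V acc hD hK hacc
    rw [List.foldl_nil]
    refine ⟨hD, hK, hacc, fun c _ _ => rfl, fun c _ h => Or.inl h, fun c hc => hc, ?_⟩
    intro d hd
    simp at hd
  | cons d ds ih =>
    intro hds V acc hD hK hacc
    have hdmem : d ∈ pvNbrs x.1 x.2 := hds d (List.mem_cons_self)
    have hGoodx : pvGood land x := conn_good land hGood hx
    by_cases hcond : pvGood land d ∧ pvGet2 V d.1 d.2 = 0
    · -- the neighbour is marked and appended
      have hstep : pvStepB land l (V, acc) d = (pvSet2 V d.1 d.2 l, acc ++ [d]) := by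
        unfold pvStepB
        rw [if_pos ((stepB_cond_iff land V d).mpr hcond)]
      have hAdjxd : pvAdj land x d := ⟨hGoodx, hcond.1, hdmem⟩
      have hConnd : pvConn land seed d := hx.tail hAdjxd
      obtain ⟨hdi, hdi2, hdj, hdj2⟩ := hcond.1.1
      have hget : ∀ c, pvInb land c → pvGet2 (pvSet2 V d.1 d.2 l) c.1 c.2 =
          if c.1 = d.1 ∧ c.2 = d.2 then l else pvGet2 V c.1 c.2 := by
        intro c hc
        exact get2_set2 land V d.1 d.2 c.1 c.2 l hD hdi hdi2 hdj hdj2 hc.1 hc.2.1 hc.2.2.1 hc.2.2.2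
      have hD1 : pvDims land (pvSet2 V d.1 d.2 l) := dims_set2 land V d.1 d.2 l hdi hD
      have hK1 : pvK1 land V0 seed l (pvSet2 V d.1 d.2 l) := by
        intro c hc
        rw [hget c hc]
        by_cases hcd : c.1 = d.1 ∧ c.2 = d.2
        · rw [if_pos hcd]
          right
          have hcd' : c = d := Prod.ext hcd.1 hcd.2
          rw [hcd']
          exact ⟨rfl, hConnd⟩
        · rw [if_neg hcd]
          exact hK c hc
      have hacc1 : ∀ c ∈ acc ++ [d], pvInb land c ∧ pvGet2 (pvSet2 V d.1 d.2 l) c.1 c.2 = l := by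
        intro c hc
        rcases List.mem_append.mp hc with h | h
        · obtain ⟨hin, hval⟩ := hacc c h
          refine ⟨hin, ?_⟩
          rw [hget c hin, if_neg ?_]
          · exact hval
          · intro hcd
            have : c = d := Prod.ext hcd.1 hcd.2
            rw [this] at hval
            rw [hcond.2] at hval
            exact hl hval.symm
        · rw [List.mem_singleton.mp h]
          refine ⟨hcond.1.1, ?_⟩
          rw [hget d hcond.1.1, if_pos ⟨rfl, rfl⟩]
      obtain ⟨c1, c2, c3, c4, c5, c6, c7⟩ :=
        ih (fun d' hd' => hds d' (List.mem_cons_of_mem _ hd')) (pvSet2 V d.1 d.2 l)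
          (acc ++ [d]) hD1 hK1 hacc1
      rw [List.foldl_cons, hstep]
      refine ⟨c1, c2, c3, ?_, ?_, ?_, ?_⟩
      · intro c hc hne
        have hcd : ¬ (c.1 = d.1 ∧ c.2 = d.2) := by
          intro hcd
          have : c = d := Prod.ext hcd.1 hcd.2
          rw [this, hcond.2] at hne
          exact hne rfl
        have : pvGet2 (pvSet2 V d.1 d.2 l) c.1 c.2 = pvGet2 V c.1 c.2 := by
          rw [hget c hc, if_neg hcd]
        rw [c4 c hc (by rw [this]; exact hne), this]
      · intro c hc hfin
        rcases c5 c hc hfin with h | h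
        · rw [hget c hc] at h
          by_cases hcd : c.1 = d.1 ∧ c.2 = d.2
          · right
            refine c6 c ?_
            have : c = d := Prod.ext hcd.1 hcd.2
            rw [this]
            exact List.mem_append_right _ (List.mem_singleton.mpr rfl)
          · rw [if_neg hcd] at h
            exact Or.inl h
        · exact Or.inr h
      · intro c hc
        exact c6 c (List.mem_append_left _ hc)
      · intro d' hd' hAdj
        rcases List.mem_cons.mp hd' with h | h
        · subst h
          have hval : pvGet2 (pvSet2 V d'.1 d'.2 l) d'.1 d'.2 = l := by
            rw [hget d' hcond.1.1, if_pos ⟨rfl, rfl⟩]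
          rw [c4 d' hcond.1.1 (by rw [hval]; exact hl), hval]
        · exact c7 d' h hAdj
    · -- no change at this neighbour
      have hstep : pvStepB land l (V, acc) d = (V, acc) := by
        unfold pvStepB
        rw [if_neg (fun hcnd => hcond ((stepB_cond_iff land V d).mp hcnd))]
      obtain ⟨c1, c2, c3, c4, c5, c6, c7⟩ :=
        ih (fun d' hd' => hds d' (List.mem_cons_of_mem _ hd')) V acc hD hK hacc
      rw [List.foldl_cons, hstep]
      refine ⟨c1, c2, c3, c4, c5, c6, ?_⟩
      intro d' hd' hAdj
      rcases List.mem_cons.mp hd' with h | h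
      · subst h
        have hConnd : pvConn land seed d' := hx.tail hAdj
        have hVd : pvGet2 V d'.1 d'.2 = l := by
          have hne : pvGet2 V d'.1 d'.2 ≠ 0 := by
            intro h0
            exact hcond ⟨hAdj.2.1, h0⟩
          rcases hK d' hAdj.2.1.1 with h | h
          · rw [hComp0 d' hConnd] at h
            exact absurd h hne
          · exact h.1
        rw [c4 d' hAdj.2.1.1 (by rw [hVd]; exact hl), hVd]
      · exact c7 d' h hAdj

-- one whole frontier round of the fill
lemma fill_round (land V0 : List (List Int)) (seed : Int × Int) (l : Int)
    (hGood : pvGood land seed) (hComp0 : ∀ c, pvConn land seed c → pvGet2 V0 c.1 c.2 = 0)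
    (hl : l ≠ 0) (hFresh : ∀ c, pvInb land c → pvGet2 V0 c.1 c.2 ≠ l) :
    ∀ (cs : List (Int × Int)) (V : List (List Int)) (acc : List (Int × Int)),
    pvDims land V → pvK1 land V0 seed l V →
    (∀ c ∈ cs, pvInb land c ∧ pvGet2 V c.1 c.2 = l) →
    (∀ c ∈ acc, pvInb land c ∧ pvGet2 V c.1 c.2 = l) →
    pvDims land (cs.foldl (fun s xy => (pvNbrs xy.1 xy.2).foldl (pvStepB land l) s) (V, acc)).1 ∧
    pvK1 land V0 seed l (cs.foldl (fun s xy => (pvNbrs xy.1 xy.2).foldl (pvStepB land l) s) (V, acc)).1 ∧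
    (∀ c ∈ (cs.foldl (fun s xy => (pvNbrs xy.1 xy.2).foldl (pvStepB land l) s) (V, acc)).2,
      pvInb land c ∧
        pvGet2 (cs.foldl (fun s xy => (pvNbrs xy.1 xy.2).foldl (pvStepB land l) s) (V, acc)).1 c.1 c.2 = l) ∧
    (∀ c, pvInb land c → pvGet2 V c.1 c.2 ≠ 0 →
      pvGet2 (cs.foldl (fun s xy => (pvNbrs xy.1 xy.2).foldl (pvStepB land l) s) (V, acc)).1 c.1 c.2 =
        pvGet2 V c.1 c.2) ∧
    ((∀ c, pvInb land c → pvGet2 V c.1 c.2 = l →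
        c ∈ cs ∨ c ∈ acc ∨ pvClosed land l V c) →
      ∀ c, pvInb land c →
        pvGet2 (cs.foldl (fun s xy => (pvNbrs xy.1 xy.2).foldl (pvStepB land l) s) (V, acc)).1 c.1 c.2 = l →
        c ∈ (cs.foldl (fun s xy => (pvNbrs xy.1 xy.2).foldl (pvStepB land l) s) (V, acc)).2 ∨
          pvClosed land l (cs.foldl (fun s xy => (pvNbrs xy.1 xy.2).foldl (pvStepB land l) s) (V, acc)).1 c) := by
  intro cs
  induction cs with
  | nil =>
    intro V acc hD hK hcs hacc
    rw [List.foldl_nil]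
    refine ⟨hD, hK, hacc, fun c _ _ => rfl, ?_⟩
    intro hhyp c hc hval
    rcases hhyp c hc hval with h | h | h
    · simp at h
    · exact Or.inl h
    · exact Or.inr h
  | cons x cs ih =>
    intro V acc hD hK hcs hacc
    have hx : pvConn land seed x := by
      obtain ⟨hin, hval⟩ := hcs x (List.mem_cons_self)
      rcases hK x hin with h | h
      · rw [hval] at h
        exact absurd h.symm (hFresh x hin)
      · exact h.2
    obtain ⟨c1, c2, c3, c4, c5, c6, c7⟩ :=
      fill_cell land V0 seed l hGood hComp0 hl x hx (pvNbrs x.1 x.2) (fun _ h => h)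
        V acc hD hK hacc
    set s1 := (pvNbrs x.1 x.2).foldl (pvStepB land l) (V, acc) with hs1
    obtain ⟨d1, d2, d3, d4, d5⟩ :=
      ih s1.1 s1.2 c1 c2
        (fun c hc => by
          obtain ⟨hin, hval⟩ := hcs c (List.mem_cons_of_mem _ hc)
          exact ⟨hin, by rw [c4 c hin (by rw [hval]; exact hl), hval]⟩)
        c3
    rw [List.foldl_cons]
    refine ⟨d1, d2, d3, ?_, ?_⟩
    · intro c hc hne
      rw [d4 c hc (by rw [c4 c hc hne]; exact hne), c4 c hc hne]
    · intro hhyp c hc hval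
      refine d5 ?_ c hc hval
      -- the transferred placement hypothesis, for the state after processing x
      intro c' hc' hval'
      rcases c5 c' hc' hval' with h | h
      · rcases hhyp c' hc' h with h2 | h2 | h2
        · rcases List.mem_cons.mp h2 with h3 | h3
          · -- c' = x : x is now closed
            subst h3
            right; right
            intro d hAdj
            exact c7 d hAdj.2.2 hAdj
          · exact Or.inl h3
        · exact Or.inr (Or.inl (c6 c' h2))
        · -- previously closed cells stay closed: marks persist
          right; right
          intro d hAdj
          have hVd : pvGet2 V d.1 d.2 = l := h2 d hAdj
          rw [c4 d hAdj.2.1.1 (by rw [hVd]; exact hl), hVd]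
      · exact Or.inr (Or.inl h)

-- the whole fill loop: at exit every marked cell is closed
lemma fill_loop (land V0 : List (List Int)) (seed : Int × Int) (l : Int)
    (hGood : pvGood land seed) (hComp0 : ∀ c, pvConn land seed c → pvGet2 V0 c.1 c.2 = 0)
    (hl : l ≠ 0) (hFresh : ∀ c, pvInb land c → pvGet2 V0 c.1 c.2 ≠ l) :
    ∀ (N : Nat) (V : List (List Int)) (f : List (Int × Int)),
    pvCount V 0 ≤ N → pvDims land V → pvK1 land V0 seed l V →
    (∀ c ∈ f, pvInb land c ∧ pvGet2 V c.1 c.2 = l) →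
    (∀ c, pvInb land c → pvGet2 V c.1 c.2 = l → c ∈ f ∨ pvClosed land l V c) →
    pvDims land (pvFillLoop land l V f) ∧ pvK1 land V0 seed l (pvFillLoop land l V f) ∧
    (∀ c, pvInb land c → pvGet2 V c.1 c.2 ≠ 0 →
      pvGet2 (pvFillLoop land l V f) c.1 c.2 = pvGet2 V c.1 c.2) ∧
    (∀ c, pvInb land c → pvGet2 (pvFillLoop land l V f) c.1 c.2 = l →
      pvClosed land l (pvFillLoop land l V f) c) := by
  intro N
  induction N using Nat.strong_induction_on with
  | _ N ihN =>
    intro V f h0 hD hK hf hplace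
    rcases f with _ | ⟨c0, f'⟩
    · rw [pvFillLoop, if_pos List.isEmpty_nil]
      refine ⟨hD, hK, fun c _ _ => rfl, ?_⟩
      intro c hc hval
      rcases hplace c hc hval with h | h
      · simp at h
      · exact h
    · rw [pvFillLoop, if_neg (by simp)]
      obtain ⟨V1, δ, hT, hD1, hcnt, hnil⟩ := roundB_an land l (c0 :: f') V hD
      obtain ⟨r1, r2, r3, r4, r5⟩ :=
        fill_round land V0 seed l hGood hComp0 hl hFresh (c0 :: f') V [] hD hK hf
          (fun c hc => by simp at hc)
      rw [hT []] at r1 r2 r3 r4 r5 ⊢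
      simp only [List.nil_append] at r1 r2 r3 r4 r5 ⊢
      have hplace1 : ∀ c, pvInb land c → pvGet2 V1 c.1 c.2 = l →
          c ∈ δ ∨ pvClosed land l V1 c := by
        refine r5 ?_
        intro c hc hval
        rcases hplace c hc hval with h | h
        · exact Or.inl h
        · exact Or.inr (Or.inr h)
      have hc0 : pvCount V1 0 + δ.length = pvCount V 0 := by
        have := hcnt 0
        rwa [if_pos rfl, if_neg (Ne.symm hl)] at this
      by_cases hlt : pvCount V1 0 < pvCount V 0
      · rw [dif_pos hlt]
        obtain ⟨e1, e2, e3, e4⟩ := ihN (pvCount V1 0) (by omega) V1 δ le_rfl hD1 r2 r3 hplace1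
        refine ⟨e1, e2, ?_, e4⟩
        intro c hc hne
        rw [e3 c hc (by rw [r4 c hc hne]; exact hne), r4 c hc hne]
      · rw [dif_neg hlt]
        have hδ : δ = [] := by
          rcases List.eq_nil_or_concat δ with h | ⟨_, _, h⟩
          · exact h
          · exfalso
            have : 0 < δ.length := by rw [h]; simp
            omega
        have hV1 : V1 = V := hnil hδ
        refine ⟨hD1, r2, ?_, ?_⟩
        · intro c hc hne
          rw [hV1]
        · intro c hc hval
          rcases hplace1 c hc hval with h | h
          · rw [hδ] at h
            simp at h
          · exact h

-- the fill marks exactly the connected component of its seed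
lemma fill_exact (land V0 : List (List Int)) (seed : Int × Int) (l : Int)
    (hD0 : pvDims land V0) (hGood : pvGood land seed)
    (hComp0 : ∀ c, pvConn land seed c → pvGet2 V0 c.1 c.2 = 0)
    (hFresh : ∀ c, pvInb land c → pvGet2 V0 c.1 c.2 ≠ l) (hl : l ≠ 0) :
    pvDims land (pvFill seed.1 seed.2 land V0 l) ∧
    ∀ c, pvInb land c →
      (pvConn land seed c → pvGet2 (pvFill seed.1 seed.2 land V0 l) c.1 c.2 = l) ∧
      (¬ pvConn land seed c →
        pvGet2 (pvFill seed.1 seed.2 land V0 l) c.1 c.2 = pvGet2 V0 c.1 c.2) := by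
  obtain ⟨hsi, hsi2, hsj, hsj2⟩ := hGood.1
  have hget : ∀ c, pvInb land c → pvGet2 (pvSet2 V0 seed.1 seed.2 l) c.1 c.2 =
      if c.1 = seed.1 ∧ c.2 = seed.2 then l else pvGet2 V0 c.1 c.2 := by
    intro c hc
    exact get2_set2 land V0 seed.1 seed.2 c.1 c.2 l hD0 hsi hsi2 hsj hsj2
      hc.1 hc.2.1 hc.2.2.1 hc.2.2.2
  have hD : pvDims land (pvSet2 V0 seed.1 seed.2 l) := dims_set2 land V0 _ _ l hsi hD0
  have hK : pvK1 land V0 seed l (pvSet2 V0 seed.1 seed.2 l) := by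
    intro c hc
    rw [hget c hc]
    by_cases hcd : c.1 = seed.1 ∧ c.2 = seed.2
    · rw [if_pos hcd]
      right
      have : c = seed := Prod.ext hcd.1 hcd.2
      rw [this]
      exact ⟨rfl, Relation.ReflTransGen.refl⟩
    · rw [if_neg hcd]
      exact Or.inl rfl
  have hfr : ∀ c ∈ [(seed.1, seed.2)], pvInb land c ∧
      pvGet2 (pvSet2 V0 seed.1 seed.2 l) c.1 c.2 = l := by
    intro c hc
    rw [List.mem_singleton.mp hc]
    exact ⟨⟨hsi, hsi2, hsj, hsj2⟩, by rw [hget (seed.1, seed.2) ⟨hsi, hsi2, hsj, hsj2⟩]; simp⟩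
  have hplace : ∀ c, pvInb land c → pvGet2 (pvSet2 V0 seed.1 seed.2 l) c.1 c.2 = l →
      c ∈ [(seed.1, seed.2)] ∨ pvClosed land l (pvSet2 V0 seed.1 seed.2 l) c := by
    intro c hc hval
    rw [hget c hc] at hval
    by_cases hcd : c.1 = seed.1 ∧ c.2 = seed.2
    · left
      rw [List.mem_singleton]
      exact Prod.ext hcd.1 hcd.2
    · rw [if_neg hcd] at hval
      exact absurd hval (hFresh c hc)
  obtain ⟨e1, e2, e3, e4⟩ :=
    fill_loop land V0 seed l hGood hComp0 hl hFresh
      (pvCount (pvSet2 V0 seed.1 seed.2 l) 0) (pvSet2 V0 seed.1 seed.2 l)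
      [(seed.1, seed.2)] le_rfl hD hK hfr hplace
  have hFillEq : pvFill seed.1 seed.2 land V0 l =
      pvFillLoop land l (pvSet2 V0 seed.1 seed.2 l) [(seed.1, seed.2)] := rfl
  rw [hFillEq]
  refine ⟨e1, ?_⟩
  have hseedmark : pvGet2 (pvFillLoop land l (pvSet2 V0 seed.1 seed.2 l) [(seed.1, seed.2)])
      seed.1 seed.2 = l := by
    have hv : pvGet2 (pvSet2 V0 seed.1 seed.2 l) seed.1 seed.2 = l := by
      rw [hget (seed.1, seed.2) ⟨hsi, hsi2, hsj, hsj2⟩]; simp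
    rw [e3 (seed.1, seed.2) ⟨hsi, hsi2, hsj, hsj2⟩ (by rw [hv]; exact hl), hv]
  intro c hc
  constructor
  · intro hconn
    clear hc
    induction hconn with
    | refl => exact hseedmark
    | tail hs hadj ihc =>
      rename_i b c'
      have hb : pvGet2 (pvFillLoop land l (pvSet2 V0 seed.1 seed.2 l) [(seed.1, seed.2)])
          b.1 b.2 = l := ihc
      exact e4 b hadj.1.1 hb c' hadj
  · intro hconn
    rcases e2 c hc with h | h
    · exact h
    · exact absurd h.2 hconn

-- the invariant of the flood-fill labelling scan
def pvT (land V : List (List Int)) (nxt : Int) : Prop :=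
  pvDims land V ∧ 0 ≤ nxt ∧
  (∀ c, pvInb land c → 0 ≤ pvGet2 V c.1 c.2 ∧ pvGet2 V c.1 c.2 ≤ nxt) ∧
  (∀ c, pvInb land c → pvGet2 V c.1 c.2 ≠ 0 → pvGood land c) ∧
  (∀ c d, pvInb land c → pvInb land d → pvGet2 V c.1 c.2 = pvGet2 V d.1 d.2 →
    pvGet2 V c.1 c.2 ≠ 0 → pvConn land c d) ∧
  (∀ c d, pvAdj land c d → pvGet2 V c.1 c.2 ≠ 0 → pvGet2 V d.1 d.2 = pvGet2 V c.1 c.2)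

-- under the invariant, a still-0 cell has a fully-0 component
lemma comp0_of_T (land V : List (List Int)) (nxt : Int) (hT : pvT land V nxt)
    (seed : Int × Int) (h0 : pvGet2 V seed.1 seed.2 = 0) :
    ∀ c, pvConn land seed c → pvGet2 V c.1 c.2 = 0 := by
  intro c hconn
  induction hconn with
  | refl => exact h0
  | tail hs hadj ihc =>
    rename_i b c'
    by_contra hne
    have := hT.2.2.2.2.2 c' b (adj_symm land hadj) hne
    rw [ihc] at this
    exact hne this.symm

-- one cell of the labelling scan
lemma scanB_cell (land V : List (List Int)) (nxt i j : Int)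
    (hT : pvT land V nxt) (hin : pvInb land (i, j)) :
    pvT land (pvInnerB land i (V, nxt) j).1 (pvInnerB land i (V, nxt) j).2 ∧
    nxt ≤ (pvInnerB land i (V, nxt) j).2 ∧
    (∀ c, pvInb land c → pvGet2 V c.1 c.2 ≠ 0 →
      pvGet2 (pvInnerB land i (V, nxt) j).1 c.1 c.2 = pvGet2 V c.1 c.2) ∧
    (pvGood land (i, j) → pvGet2 (pvInnerB land i (V, nxt) j).1 i j ≠ 0) := by
  obtain ⟨hD, hn0, hbnd, hgd, hcn, hcl⟩ := hT
  unfold pvInnerB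
  by_cases hc : pvGet2 land i j = 1 ∧ pvGet2 V i j = 0
  · rw [if_pos hc]
    simp only
    have hGood : pvGood land (i, j) := ⟨hin, hc.1⟩
    have hComp0 : ∀ c, pvConn land (i, j) c → pvGet2 V c.1 c.2 = 0 :=
      comp0_of_T land V nxt ⟨hD, hn0, hbnd, hgd, hcn, hcl⟩ (i, j) hc.2
    have hFresh : ∀ c, pvInb land c → pvGet2 V c.1 c.2 ≠ nxt + 1 := by
      intro c hcin
      have := hbnd c hcin
      omega
    have hl : nxt + 1 ≠ 0 := by omega
    obtain ⟨hDF, hchar⟩ := fill_exact land V (i, j) (nxt + 1) hD hGood hComp0 hFresh hl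
    -- marked exactly on the component, old value elsewhere
    have hmk : ∀ c, pvInb land c → pvConn land (i, j) c →
        pvGet2 (pvFill i j land V (nxt + 1)) c.1 c.2 = nxt + 1 := fun c hcin h =>
      (hchar c hcin).1 h
    have hold : ∀ c, pvInb land c → ¬ pvConn land (i, j) c →
        pvGet2 (pvFill i j land V (nxt + 1)) c.1 c.2 = pvGet2 V c.1 c.2 := fun c hcin h =>
      (hchar c hcin).2 h
    have hmk_iff : ∀ c, pvInb land c →
        (pvGet2 (pvFill i j land V (nxt + 1)) c.1 c.2 = nxt + 1 ↔ pvConn land (i, j) c) := by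
      intro c hcin
      constructor
      · intro hval
        by_contra hnc
        rw [hold c hcin hnc] at hval
        exact hFresh c hcin hval
      · exact hmk c hcin
    refine ⟨⟨hDF, by omega, ?_, ?_, ?_, ?_⟩, by omega, ?_, ?_⟩
    · intro c hcin
      by_cases hco : pvConn land (i, j) c
      · rw [hmk c hcin hco]; omega
      · rw [hold c hcin hco]
        have := hbnd c hcin
        omega
    · intro c hcin hne
      by_cases hco : pvConn land (i, j) c
      · exact conn_good land hGood hco
      · rw [hold c hcin hco] at hne
        exact hgd c hcin hne
    · intro c d hcin hdin heq hne
      by_cases hco : pvConn land (i, j) c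
      · have hvc := hmk c hcin hco
        have hvd : pvConn land (i, j) d := by
          refine (hmk_iff d hdin).mp ?_
          rw [← heq, hvc]
        exact (conn_symm land hco).trans hvd
      · have hvc := hold c hcin hco
        by_cases hdo : pvConn land (i, j) d
        · exfalso
          have := hmk d hdin hdo
          rw [hvc] at heq
          rw [this] at heq
          have := hbnd c hcin
          omega
        · rw [hvc] at heq hne
          rw [hold d hdin hdo] at heq
          exact hcn c d hcin hdin heq hne
    · intro c d hadj hne
      by_cases hco : pvConn land (i, j) c
      · rw [hmk d hadj.2.1.1 (hco.tail hadj), hmk c hadj.1.1 hco]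
      · have hdo : ¬ pvConn land (i, j) d := by
          intro h
          exact hco (h.tail (adj_symm land hadj))
        rw [hold c hadj.1.1 hco] at hne ⊢
        rw [hold d hadj.2.1.1 hdo]
        exact hcl c d hadj hne
    · intro c hcin hne
      have hco : ¬ pvConn land (i, j) c := by
        intro h
        rw [hComp0 c h] at hne
        exact hne rfl
      exact hold c hcin hco
    · intro _
      have : pvGet2 (pvFill i j land V (nxt + 1)) i j = nxt + 1 :=
        hmk (i, j) hin Relation.ReflTransGen.refl
      rw [this]
      omega
  · rw [if_neg hc]
    refine ⟨⟨hD, hn0, hbnd, hgd, hcn, hcl⟩, le_rfl, fun c _ _ => rfl, ?_⟩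
    intro hGood hz
    exact hc ⟨hGood.2, hz⟩

-- one row of the labelling scan
lemma scanB_row (land : List (List Int)) (i : Int) :
    ∀ (js : List Int) (V : List (List Int)) (nxt : Int),
    (∀ j ∈ js, pvInb land (i, j)) → pvT land V nxt →
    pvT land (js.foldl (pvInnerB land i) (V, nxt)).1 (js.foldl (pvInnerB land i) (V, nxt)).2 ∧
    (∀ c, pvInb land c → pvGet2 V c.1 c.2 ≠ 0 →
      pvGet2 (js.foldl (pvInnerB land i) (V, nxt)).1 c.1 c.2 = pvGet2 V c.1 c.2) ∧
    (∀ j' ∈ js, pvGood land (i, j') →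
      pvGet2 (js.foldl (pvInnerB land i) (V, nxt)).1 i j' ≠ 0) := by
  intro js
  induction js with
  | nil =>
    intro V nxt _ hT
    rw [List.foldl_nil]
    exact ⟨hT, fun c _ _ => rfl, fun j' hj' => absurd hj' (by simp)⟩
  | cons j js ih =>
    intro V nxt hjs hT
    have hin : pvInb land (i, j) := hjs j (List.mem_cons_self)
    obtain ⟨t1, t2, t3, t4⟩ := scanB_cell land V nxt i j hT hin
    obtain ⟨u1, u2, u3⟩ :=
      ih (pvInnerB land i (V, nxt) j).1 (pvInnerB land i (V, nxt) j).2
        (fun j' hj' => hjs j' (List.mem_cons_of_mem _ hj')) t1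
    rw [List.foldl_cons]
    have hfold : js.foldl (pvInnerB land i)
        ((pvInnerB land i (V, nxt) j).1, (pvInnerB land i (V, nxt) j).2) =
        js.foldl (pvInnerB land i) (pvInnerB land i (V, nxt) j) := by rfl
    refine ⟨by rw [← hfold] at u1 ⊢; exact u1, ?_, ?_⟩
    · intro c hc hne
      rw [← hfold] at u2
      rw [u2 c hc (by rw [t3 c hc hne]; exact hne), t3 c hc hne]
    · intro j' hj' hGoodj
      rcases List.mem_cons.mp hj' with h | h
      · subst h
        have hcv := t4 hGoodj
        rw [← hfold] at u2
        rw [u2 (i, j') hin hcv]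
        exact hcv
      · rw [← hfold] at u3
        exact u3 j' h hGoodj

-- the whole labelling scan
lemma scanB_all (land : List (List Int)) :
    ∀ (is : List Int) (V : List (List Int)) (nxt : Int),
    (∀ i ∈ is, 0 ≤ i ∧ i < (land.length : Int)) → pvT land V nxt →
    pvT land
      (is.foldl (fun st i =>
        (PySem.List.pyRange 0 (PySem.List.len (PySem.List.pyGetD land 0 [])) 1).foldl
          (pvInnerB land i) st) (V, nxt)).1
      (is.foldl (fun st i =>
        (PySem.List.pyRange 0 (PySem.List.len (PySem.List.pyGetD land 0 [])) 1).foldl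
          (pvInnerB land i) st) (V, nxt)).2 ∧
    (∀ c, pvInb land c → pvGet2 V c.1 c.2 ≠ 0 →
      pvGet2 (is.foldl (fun st i =>
        (PySem.List.pyRange 0 (PySem.List.len (PySem.List.pyGetD land 0 [])) 1).foldl
          (pvInnerB land i) st) (V, nxt)).1 c.1 c.2 = pvGet2 V c.1 c.2) ∧
    (∀ c, c.1 ∈ is → pvInb land c → pvGood land c →
      pvGet2 (is.foldl (fun st i =>
        (PySem.List.pyRange 0 (PySem.List.len (PySem.List.pyGetD land 0 [])) 1).foldl
          (pvInnerB land i) st) (V, nxt)).1 c.1 c.2 ≠ 0) := by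
  intro is
  induction is with
  | nil =>
    intro V nxt _ hT
    rw [List.foldl_nil]
    exact ⟨hT, fun c _ _ => rfl, fun c hc => absurd hc (by simp)⟩
  | cons i is ih =>
    intro V nxt his hT
    have hrow := scanB_row land i
      (PySem.List.pyRange 0 (PySem.List.len (PySem.List.pyGetD land 0 [])) 1) V nxt
      (fun j hj => by
        rw [PySem.List.len_eq] at hj
        have := PySem.List.mem_pyRange_one.mp hj
        have hb := his i (List.mem_cons_self)
        exact ⟨hb.1, hb.2, this.1, by unfold pvW; exact this.2⟩)
      hT
    obtain ⟨t1, t2, t3⟩ := hrow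
    set st1 := ((PySem.List.pyRange 0 (PySem.List.len (PySem.List.pyGetD land 0 [])) 1).foldl
      (pvInnerB land i) (V, nxt)) with hst1
    obtain ⟨u1, u2, u3⟩ := ih st1.1 st1.2 (fun i' hi' => his i' (List.mem_cons_of_mem _ hi')) t1
    rw [List.foldl_cons]
    have hfold : is.foldl (fun st i =>
        (PySem.List.pyRange 0 (PySem.List.len (PySem.List.pyGetD land 0 [])) 1).foldl
          (pvInnerB land i) st) st1 =
        is.foldl (fun st i =>
          (PySem.List.pyRange 0 (PySem.List.len (PySem.List.pyGetD land 0 [])) 1).foldl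
            (pvInnerB land i) st) (st1.1, st1.2) := by rfl
    rw [hfold] at u1 u2 u3 ⊢
    refine ⟨u1, ?_, ?_⟩
    · intro c hc hne
      rw [u2 c hc (by rw [t2 c hc hne]; exact hne), t2 c hc hne]
    · intro c hc hcin hGoodc
      obtain ⟨ci, cj⟩ := c
      rcases List.mem_cons.mp hc with h | h
      · have h' : ci = i := h
        subst h'
        have hmem : cj ∈ PySem.List.pyRange 0
            (PySem.List.len (PySem.List.pyGetD land 0 [])) 1 := by
          rw [PySem.List.len_eq]
          refine PySem.List.mem_pyRange_one.mpr ?_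
          have h4 := hcin.2.2.2
          unfold pvW at h4
          exact ⟨hcin.2.2.1, by omega⟩
        have hcv := t3 cj hmem hGoodc
        rw [u2 (ci, cj) hcin hcv]
        exact hcv
      · exact u3 (ci, cj) h hcin hGoodc

-- ===== stage 2a: the flood-fill matrix labels the components =====
lemma mid_labels (land : List (List Int)) :
    pvLabels land
      ((PySem.List.pyRange 0 (PySem.List.len land) 1).foldl (fun st i =>
        (PySem.List.pyRange 0 (PySem.List.len (PySem.List.pyGetD land 0 [])) 1).foldl
          (pvInnerB land i) st)
        (((PySem.List.pyRange 0 (PySem.List.len land) 1).map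
          (fun _ => PySem.List.pyRepeat [(0 : Int)] (PySem.List.len (PySem.List.pyGetD land 0 [])))),
          (0 : Int))).1 := by
  rw [init_eq land]
  have hz : ∀ c, pvInb land c → pvGet2 ((PySem.List.pyRange 0 (PySem.List.len land) 1).map
      (fun _ => (PySem.List.pyRange 0 (PySem.List.len (PySem.List.pyGetD land 0 [])) 1).map
        (fun _ => (0 : Int)))) c.1 c.2 = 0 := by
    intro c hc
    exact get2_build (fun _ _ => 0) (PySem.List.len land)
      (PySem.List.len (PySem.List.pyGetD land 0 [])) c.1 c.2 hc.1
      (by rw [PySem.List.len_eq]; exact hc.2.1) hc.2.2.1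
      (by rw [PySem.List.len_eq]; exact hc.2.2.2)
  have hT0 : pvT land ((PySem.List.pyRange 0 (PySem.List.len land) 1).map
      (fun _ => (PySem.List.pyRange 0 (PySem.List.len (PySem.List.pyGetD land 0 [])) 1).map
        (fun _ => (0 : Int)))) 0 := by
    refine ⟨?_, le_rfl, ?_, ?_, ?_, ?_⟩
    · have := dims_build land (fun _ _ => (0 : Int))
      exact this
    · intro c hc
      rw [hz c hc]
      omega
    · intro c hc hne
      exact absurd (hz c hc) hne
    · intro c d hc _ _ hne
      exact absurd (hz c hc) hne
    · intro c d hadj hne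
      exact absurd (hz c hadj.1.1) hne
  obtain ⟨t1, t2, t3⟩ := scanB_all land (PySem.List.pyRange 0 (PySem.List.len land) 1)
    ((PySem.List.pyRange 0 (PySem.List.len land) 1).map
      (fun _ => (PySem.List.pyRange 0 (PySem.List.len (PySem.List.pyGetD land 0 [])) 1).map
        (fun _ => (0 : Int)))) 0
    (fun i hi => by
      rw [PySem.List.len_eq] at hi
      exact PySem.List.mem_pyRange_one.mp hi)
    hT0
  obtain ⟨hD, hn0, hbnd, hgd, hcn, hcl⟩ := t1
  have hbw : ∀ c, pvInb land c → pvGood land c →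
      pvGet2 ((PySem.List.pyRange 0 (PySem.List.len land) 1).foldl (fun st i =>
        (PySem.List.pyRange 0 (PySem.List.len (PySem.List.pyGetD land 0 [])) 1).foldl
          (pvInnerB land i) st)
        (((PySem.List.pyRange 0 (PySem.List.len land) 1).map
          (fun _ => (PySem.List.pyRange 0 (PySem.List.len (PySem.List.pyGetD land 0 [])) 1).map
            (fun _ => (0 : Int)))), (0 : Int))).1 c.1 c.2 ≠ 0 := by
    intro c hc hGood
    refine t3 c ?_ hc hGood
    rw [PySem.List.len_eq]
    exact PySem.List.mem_pyRange_one.mpr ⟨hc.1, hc.2.1⟩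
  refine ⟨hD, ?_, hcn, ?_⟩
  · intro c hc
    exact ⟨hgd c hc, hbw c hc⟩
  · intro c d hconn
    induction hconn with
    | refl => rfl
    | tail hs hadj ihc =>
      rename_i b c'
      have hb := hbw b hadj.1.1 hadj.1
      exact ihc.trans (hcl b c' hadj hb).symm

-- ===== stage 2b helpers =====
-- the unique id a cell starts from
def pvId (land : List (List Int)) (c : Int × Int) : Int :=
  c.1 * (pvW land : Int) + c.2 + 1

lemma id_pos (land : List (List Int)) (d : Int × Int) (h : pvGood land d) :
    1 ≤ pvId land d := by
  obtain ⟨⟨h1, h2, h3, h4⟩, _⟩ := h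
  have : 0 ≤ d.1 * (pvW land : Int) :=
    mul_nonneg h1 (by positivity)
  unfold pvId
  omega

lemma id_inj (land : List (List Int)) (d e : Int × Int) (hd : pvGood land d)
    (he : pvGood land e) (h : pvId land d = pvId land e) : d = e := by
  obtain ⟨⟨d1, d2, d3, d4⟩, _⟩ := hd
  obtain ⟨⟨e1, e2, e3, e4⟩, _⟩ := he
  unfold pvId at h
  have h1 : d.1 = e.1 := by
    by_contra hne
    rcases lt_or_gt_of_ne hne with hlt | hlt
    · have hs : d.1 + 1 ≤ e.1 := hlt
      have := mul_le_mul_of_nonneg_right hs (show (0 : Int) ≤ (pvW land : Int) by positivity)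
      rw [add_mul, one_mul] at this
      omega
    · have hs : e.1 + 1 ≤ d.1 := hlt
      have := mul_le_mul_of_nonneg_right hs (show (0 : Int) ≤ (pvW land : Int) by positivity)
      rw [add_mul, one_mul] at this
      omega
  refine Prod.ext h1 ?_
  rw [h1] at h
  omega

-- the propagation invariant: every nonzero entry is the id of a connected cell
def pvP (land m : List (List Int)) : Prop :=
  pvDims land m ∧ ∀ c, pvInb land c →
    (pvGood land c → ∃ d, pvGood land d ∧ pvConn land d c ∧
      pvGet2 m c.1 c.2 = pvId land d) ∧
    (¬ pvGood land c → pvGet2 m c.1 c.2 = 0)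

-- reading one cell of a sweep
lemma sweep_get (land m : List (List Int)) (c : Int × Int) (hc : pvInb land c) :
    pvGet2 (pvSweep land (PySem.List.len land)
        (PySem.List.len (PySem.List.pyGetD land 0 [])) m) c.1 c.2 =
      if pvGet2 land c.1 c.2 = 1 then
        (PySem.List.min? (pvGet2 m c.1 c.2 ::
            ((pvNbrs c.1 c.2).filter (fun q =>
              decide (0 ≤ q.1 ∧ q.1 < PySem.List.len land ∧ 0 ≤ q.2 ∧
                q.2 < PySem.List.len (PySem.List.pyGetD land 0 []) ∧
                pvGet2 land q.1 q.2 = 1))).map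
              (fun q => pvGet2 m q.1 q.2)) (fun v => v)).getD 0
      else 0 := by
  unfold pvSweep
  exact get2_build _ _ _ c.1 c.2 hc.1 (by rw [PySem.List.len_eq]; exact hc.2.1)
    hc.2.2.1 (by rw [PySem.List.len_eq]; exact hc.2.2.2)

-- membership of a neighbour's value in the min list
lemma sweep_elem_mem (land m : List (List Int)) (c d : Int × Int)
    (hd : pvGood land d) (hmem : d ∈ pvNbrs c.1 c.2) :
    pvGet2 m d.1 d.2 ∈ (pvGet2 m c.1 c.2 ::
      ((pvNbrs c.1 c.2).filter (fun q =>
        decide (0 ≤ q.1 ∧ q.1 < PySem.List.len land ∧ 0 ≤ q.2 ∧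
          q.2 < PySem.List.len (PySem.List.pyGetD land 0 []) ∧
          pvGet2 land q.1 q.2 = 1))).map
        (fun q => pvGet2 m q.1 q.2)) := by
  refine List.mem_cons_of_mem _ ?_
  refine List.mem_map.mpr ⟨d, ?_, rfl⟩
  refine List.mem_filter.mpr ⟨hmem, ?_⟩
  refine decide_eq_true ?_
  obtain ⟨⟨h1, h2, h3, h4⟩, h5⟩ := hd
  rw [PySem.List.len_eq, PySem.List.len_eq]
  exact ⟨h1, h2, h3, h4, h5⟩

-- one sweep preserves the invariant and never increases an entry
lemma sweep_P (land m : List (List Int)) (hP : pvP land m) :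
    pvP land (pvSweep land (PySem.List.len land)
      (PySem.List.len (PySem.List.pyGetD land 0 [])) m) ∧
    (∀ c, pvInb land c →
      0 ≤ pvGet2 (pvSweep land (PySem.List.len land)
          (PySem.List.len (PySem.List.pyGetD land 0 [])) m) c.1 c.2 ∧
      pvGet2 (pvSweep land (PySem.List.len land)
          (PySem.List.len (PySem.List.pyGetD land 0 [])) m) c.1 c.2 ≤
        pvGet2 m c.1 c.2) := by
  obtain ⟨hD, hent⟩ := hP
  have key : ∀ c, pvInb land c → pvGood land c →
      ∃ d, pvGood land d ∧ pvConn land d c ∧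
        pvGet2 (pvSweep land (PySem.List.len land)
          (PySem.List.len (PySem.List.pyGetD land 0 [])) m) c.1 c.2 = pvId land d ∧
        pvGet2 (pvSweep land (PySem.List.len land)
          (PySem.List.len (PySem.List.pyGetD land 0 [])) m) c.1 c.2 ≤ pvGet2 m c.1 c.2 := by
    intro c hc hGood
    rw [sweep_get land m c hc, if_pos hGood.2]
    set L := (pvGet2 m c.1 c.2 ::
      ((pvNbrs c.1 c.2).filter (fun q =>
        decide (0 ≤ q.1 ∧ q.1 < PySem.List.len land ∧ 0 ≤ q.2 ∧
          q.2 < PySem.List.len (PySem.List.pyGetD land 0 []) ∧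
          pvGet2 land q.1 q.2 = 1))).map
        (fun q => pvGet2 m q.1 q.2)) with hL
    have hLne : L ≠ [] := by rw [hL]; simp
    obtain ⟨mn, hmn⟩ : ∃ mn, PySem.List.min? L (fun v => v) = some mn := by
      cases hq : PySem.List.min? L (fun v => v) with
      | none =>
        rw [PySem.List.min?_eq_none_iff] at hq
        exact absurd hq hLne
      | some mn => exact ⟨mn, rfl⟩
    rw [hmn]
    simp only [Option.getD_some]
    have hmem := PySem.List.min?_mem hmn
    have hmin := PySem.List.min?_isMin hmn
    have hΦ : ∀ v ∈ L, ∃ d, pvGood land d ∧ pvConn land d c ∧ v = pvId land d := by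
      intro v hv
      rw [hL] at hv
      rcases List.mem_cons.mp hv with h | h
      · obtain ⟨d, hd1, hd2, hd3⟩ := (hent c hc).1 hGood
        exact ⟨d, hd1, hd2, by rw [h]; exact hd3⟩
      · obtain ⟨q, hq, rfl⟩ := List.mem_map.mp h
        obtain ⟨hqn, hqd⟩ := List.mem_filter.mp hq
        have hqp := of_decide_eq_true hqd
        rw [PySem.List.len_eq, PySem.List.len_eq] at hqp
        have hGoodq : pvGood land q :=
          ⟨⟨hqp.1, hqp.2.1, hqp.2.2.1, hqp.2.2.2.1⟩, hqp.2.2.2.2⟩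
        obtain ⟨e, he1, he2, he3⟩ := (hent q hGoodq.1).1 hGoodq
        have hAdj : pvAdj land q c := ⟨hGoodq, hGood, nbrs_symm c q hqn⟩
        exact ⟨e, he1, he2.tail hAdj, he3⟩
    obtain ⟨d, hd1, hd2, hd3⟩ := hΦ mn hmem
    refine ⟨d, hd1, hd2, hd3, ?_⟩
    have : mn ≤ pvGet2 m c.1 c.2 := hmin _ (by rw [hL]; exact List.mem_cons_self)
    exact this
  constructor
  · refine ⟨by unfold pvSweep; exact dims_build land _, ?_⟩
    intro c hc
    constructor
    · intro hGood
      obtain ⟨d, h1, h2, h3, _⟩ := key c hc hGood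
      exact ⟨d, h1, h2, h3⟩
    · intro hGood
      rw [sweep_get land m c hc, if_neg (fun h => hGood ⟨hc, h⟩)]
  · intro c hc
    by_cases hGood : pvGood land c
    · obtain ⟨d, h1, h2, h3, h4⟩ := key c hc hGood
      refine ⟨?_, h4⟩
      rw [h3]
      have := id_pos land d h1
      omega
    · rw [sweep_get land m c hc, if_neg (fun h => hGood ⟨hc, h⟩)]
      have := (hent c hc).2 hGood
      rw [this]
      exact ⟨le_rfl, le_rfl⟩

-- ===== list-sum comparison lemmas for the totality guard =====
lemma row_sum_le : ∀ (a b : List Int), a.length = b.length →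
    (∀ k : Nat, a.getD k 0 ≤ b.getD k 0 ∧ 0 ≤ a.getD k 0) →
    (a.map Int.toNat).sum ≤ (b.map Int.toNat).sum := by
  intro a
  induction a with
  | nil => intro b _ _; simp
  | cons x xs ih =>
    intro b hlen hk
    cases b with
    | nil => simp at hlen
    | cons y ys =>
      simp only [List.map_cons, List.sum_cons]
      have h0 := hk 0
      simp only [List.getD_cons_zero] at h0
      have ht : (xs.map Int.toNat).sum ≤ (ys.map Int.toNat).sum := by
        refine ih ys (by simpa using hlen) ?_
        intro k
        have := hk (k + 1)
        simpa using this
      omega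

lemma row_sum_lt : ∀ (a b : List Int), a.length = b.length →
    (∀ k : Nat, a.getD k 0 ≤ b.getD k 0 ∧ 0 ≤ a.getD k 0) →
    a ≠ b → (a.map Int.toNat).sum < (b.map Int.toNat).sum := by
  intro a
  induction a with
  | nil =>
    intro b hlen _ hne
    cases b with
    | nil => exact absurd rfl hne
    | cons y ys => simp at hlen
  | cons x xs ih =>
    intro b hlen hk hne
    cases b with
    | nil => simp at hlen
    | cons y ys =>
      simp only [List.map_cons, List.sum_cons]
      have h0 := hk 0
      simp only [List.getD_cons_zero] at h0
      by_cases hxy : x = y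
      · subst hxy
        have hne' : xs ≠ ys := fun h => hne (by rw [h])
        have := ih ys (by simpa using hlen) (fun k => by simpa using hk (k + 1)) hne'
        omega
      · have hlt : x < y := lt_of_le_of_ne h0.1 hxy
        have ht : (xs.map Int.toNat).sum ≤ (ys.map Int.toNat).sum :=
          row_sum_le xs ys (by simpa using hlen) (fun k => by simpa using hk (k + 1))
        omega

lemma sumNat_cons (r : List Int) (rest : List (List Int)) :
    pvSumNat (r :: rest) = (r.map Int.toNat).sum + pvSumNat rest := by
  unfold pvSumNat
  rw [List.flatten_cons, List.map_append, List.sum_append]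

lemma mat_sum_le : ∀ (n m : List (List Int)), n.length = m.length →
    (∀ i : Nat, (n.getD i []).length = (m.getD i []).length) →
    (∀ i k : Nat, (n.getD i []).getD k 0 ≤ (m.getD i []).getD k 0 ∧
      0 ≤ (n.getD i []).getD k 0) →
    pvSumNat n ≤ pvSumNat m := by
  intro n
  induction n with
  | nil => intro m _ _ _; unfold pvSumNat; simp
  | cons r rest ih =>
    intro m hlen hrow hle
    cases m with
    | nil => simp at hlen
    | cons s srest =>
      rw [sumNat_cons, sumNat_cons]
      have h0 : (r.map Int.toNat).sum ≤ (s.map Int.toNat).sum := by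
        refine row_sum_le r s (by simpa using hrow 0) (fun k => by simpa using hle 0 k)
      have ht : pvSumNat rest ≤ pvSumNat srest :=
        ih srest (by simpa using hlen) (fun i => by simpa using hrow (i + 1))
          (fun i k => by simpa using hle (i + 1) k)
      omega

lemma mat_sum_lt : ∀ (n m : List (List Int)), n.length = m.length →
    (∀ i : Nat, (n.getD i []).length = (m.getD i []).length) →
    (∀ i k : Nat, (n.getD i []).getD k 0 ≤ (m.getD i []).getD k 0 ∧
      0 ≤ (n.getD i []).getD k 0) →
    n ≠ m → pvSumNat n < pvSumNat m := by
  intro n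
  induction n with
  | nil =>
    intro m hlen _ _ hne
    cases m with
    | nil => exact absurd rfl hne
    | cons s srest => simp at hlen
  | cons r rest ih =>
    intro m hlen hrow hle hne
    cases m with
    | nil => simp at hlen
    | cons s srest =>
      rw [sumNat_cons, sumNat_cons]
      by_cases hrs : r = s
      · subst hrs
        have hne' : rest ≠ srest := fun h => hne (by rw [h])
        have := ih srest (by simpa using hlen) (fun i => by simpa using hrow (i + 1))
          (fun i k => by simpa using hle (i + 1) k) hne'
        omega
      · have h0 : (r.map Int.toNat).sum < (s.map Int.toNat).sum :=
          row_sum_lt r s (by simpa using hrow 0) (fun k => by simpa using hle 0 k) hrs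
        have ht : pvSumNat rest ≤ pvSumNat srest :=
          mat_sum_le rest srest (by simpa using hlen) (fun i => by simpa using hrow (i + 1))
            (fun i k => by simpa using hle (i + 1) k)
        omega

lemma get2_natCast (v : List (List Int)) (i k : Nat) :
    pvGet2 v (i : Int) (k : Int) = (v.getD i []).getD k 0 := by
  unfold pvGet2
  rw [PySem.List.pyGetD_natCast, PySem.List.pyGetD_natCast]

-- translate in-bounds pointwise facts into the unconditional getD form
lemma pointwise_to_getD (land n m : List (List Int)) (hDn : pvDims land n)
    (hDm : pvDims land m)
    (hle : ∀ c, pvInb land c → 0 ≤ pvGet2 n c.1 c.2 ∧ pvGet2 n c.1 c.2 ≤ pvGet2 m c.1 c.2) :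
    n.length = m.length ∧ (∀ i : Nat, (n.getD i []).length = (m.getD i []).length) ∧
    (∀ i k : Nat, (n.getD i []).getD k 0 ≤ (m.getD i []).getD k 0 ∧
      0 ≤ (n.getD i []).getD k 0) := by
  have hlen : n.length = m.length := by rw [hDn.1, hDm.1]
  have hrow : ∀ i : Nat, (n.getD i []).length = (m.getD i []).length := by
    intro i
    by_cases hi : i < n.length
    · rw [List.getD_eq_getElem n [] hi, List.getD_eq_getElem m [] (by omega)]
      rw [hDn.2 _ (List.getElem_mem hi), hDm.2 _ (List.getElem_mem (by omega))]
    · rw [List.getD_eq_default n [] (by omega), List.getD_eq_default m [] (by omega)]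
  refine ⟨hlen, hrow, ?_⟩
  intro i k
  by_cases hi : i < n.length
  · by_cases hk : k < (n.getD i []).length
    · have hinb : pvInb land ((i : Int), (k : Int)) := by
        have h1 := hDn.1
        have h2 : (n.getD i []).length = pvW land := by
          rw [List.getD_eq_getElem n [] hi]
          exact hDn.2 _ (List.getElem_mem hi)
        exact ⟨by omega, by omega, by omega, by omega⟩
      have := hle ((i : Int), (k : Int)) hinb
      rw [get2_natCast n i k, get2_natCast m i k] at this
      exact ⟨this.2, this.1⟩
    · rw [List.getD_eq_default _ _ (by omega),
        List.getD_eq_default _ _ (by rw [← hrow i]; omega)]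
      exact ⟨le_rfl, le_rfl⟩
  · rw [List.getD_eq_default n [] (by omega), List.getD_eq_default m [] (by omega)]
    simp

-- the propagation loop reaches a fixpoint satisfying the invariant
lemma prop_loop (land : List (List Int)) :
    ∀ (N : Nat) (m : List (List Int)), pvSumNat m ≤ N → pvP land m →
    pvP land (pvPropLoop land (PySem.List.len land)
      (PySem.List.len (PySem.List.pyGetD land 0 [])) m) ∧
    pvSweep land (PySem.List.len land) (PySem.List.len (PySem.List.pyGetD land 0 []))
      (pvPropLoop land (PySem.List.len land)
        (PySem.List.len (PySem.List.pyGetD land 0 [])) m) =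
      pvPropLoop land (PySem.List.len land)
        (PySem.List.len (PySem.List.pyGetD land 0 [])) m := by
  intro N
  induction N using Nat.strong_induction_on with
  | _ N ihN =>
    intro m h0 hP
    rw [pvPropLoop]
    by_cases hfix : pvSweep land (PySem.List.len land)
        (PySem.List.len (PySem.List.pyGetD land 0 [])) m = m
    · rw [if_pos hfix]
      exact ⟨hP, hfix⟩
    · rw [if_neg hfix]
      obtain ⟨hPn, hle⟩ := sweep_P land m hP
      have hdec : pvSumNat (pvSweep land (PySem.List.len land)
          (PySem.List.len (PySem.List.pyGetD land 0 [])) m) < pvSumNat m := by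
        obtain ⟨b1, b2, b3⟩ := pointwise_to_getD land _ m hPn.1 hP.1 hle
        exact mat_sum_lt _ m b1 b2 b3 hfix
      rw [dif_pos hdec]
      exact ihN (pvSumNat (pvSweep land (PySem.List.len land)
        (PySem.List.len (PySem.List.pyGetD land 0 [])) m)) (by omega) _ le_rfl hPn

-- the initial matrix satisfies the invariant
lemma init_P (land : List (List Int)) :
    pvP land (pvInit land (PySem.List.len land)
      (PySem.List.len (PySem.List.pyGetD land 0 []))) := by
  have hget : ∀ c, pvInb land c →
      pvGet2 (pvInit land (PySem.List.len land)
        (PySem.List.len (PySem.List.pyGetD land 0 []))) c.1 c.2 =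
      if pvGet2 land c.1 c.2 = 1 then
        c.1 * PySem.List.len (PySem.List.pyGetD land 0 []) + c.2 + 1 else 0 := by
    intro c hc
    unfold pvInit
    exact get2_build _ _ _ c.1 c.2 hc.1 (by rw [PySem.List.len_eq]; exact hc.2.1)
      hc.2.2.1 (by rw [PySem.List.len_eq]; exact hc.2.2.2)
  refine ⟨by unfold pvInit; exact dims_build land _, ?_⟩
  intro c hc
  constructor
  · intro hGood
    refine ⟨c, hGood, Relation.ReflTransGen.refl, ?_⟩
    rw [hget c hc, if_pos hGood.2]
    unfold pvId pvW
    rw [PySem.List.len_eq]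
  · intro hGood
    rw [hget c hc, if_neg (fun h => hGood ⟨hc, h⟩)]

-- ===== stage 2b: the propagation fixpoint labels the components =====
lemma prop_labels (land : List (List Int)) :
    pvLabels land
      (pvPropLoop land (PySem.List.len land) (PySem.List.len (PySem.List.pyGetD land 0 []))
        (pvInit land (PySem.List.len land) (PySem.List.len (PySem.List.pyGetD land 0 [])))) := by
  obtain ⟨hPF, hfix⟩ := prop_loop land
    (pvSumNat (pvInit land (PySem.List.len land)
      (PySem.List.len (PySem.List.pyGetD land 0 []))))
    (pvInit land (PySem.List.len land) (PySem.List.len (PySem.List.pyGetD land 0 [])))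
    le_rfl (init_P land)
  set F := pvPropLoop land (PySem.List.len land)
    (PySem.List.len (PySem.List.pyGetD land 0 []))
    (pvInit land (PySem.List.len land) (PySem.List.len (PySem.List.pyGetD land 0 [])))
    with hF
  have hM1 : ∀ c, pvInb land c → (pvGet2 F c.1 c.2 ≠ 0 ↔ pvGood land c) := by
    intro c hc
    constructor
    · intro hne
      by_contra hGood
      exact hne ((hPF.2 c hc).2 hGood)
    · intro hGood
      obtain ⟨d, hd1, _, hd3⟩ := (hPF.2 c hc).1 hGood
      rw [hd3]
      have := id_pos land d hd1
      omega
  have hAdjEqHalf : ∀ c d, pvAdj land c d → pvGet2 F c.1 c.2 ≤ pvGet2 F d.1 d.2 := by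
    intro c d hadj
    have hc := hadj.1.1
    have hfx : pvGet2 F c.1 c.2 = pvGet2 (pvSweep land (PySem.List.len land)
        (PySem.List.len (PySem.List.pyGetD land 0 [])) F) c.1 c.2 := by
      rw [hfix]
    rw [hfx, sweep_get land F c hc, if_pos hadj.1.2]
    set L := (pvGet2 F c.1 c.2 ::
      ((pvNbrs c.1 c.2).filter (fun q =>
        decide (0 ≤ q.1 ∧ q.1 < PySem.List.len land ∧ 0 ≤ q.2 ∧
          q.2 < PySem.List.len (PySem.List.pyGetD land 0 []) ∧
          pvGet2 land q.1 q.2 = 1))).map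
        (fun q => pvGet2 F q.1 q.2)) with hL
    obtain ⟨mn, hmn⟩ : ∃ mn, PySem.List.min? L (fun v => v) = some mn := by
      cases hq : PySem.List.min? L (fun v => v) with
      | none =>
        rw [PySem.List.min?_eq_none_iff] at hq
        exact absurd hq (by rw [hL]; simp)
      | some mn => exact ⟨mn, rfl⟩
    rw [hmn]
    simp only [Option.getD_some]
    have hmin := PySem.List.min?_isMin hmn
    exact hmin _ (sweep_elem_mem land F c d hadj.2.1 hadj.2.2)
  have hAdjEq : ∀ c d, pvAdj land c d → pvGet2 F c.1 c.2 = pvGet2 F d.1 d.2 :=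
    fun c d hadj => le_antisymm (hAdjEqHalf c d hadj)
      (hAdjEqHalf d c (adj_symm land hadj))
  refine ⟨hPF.1, hM1, ?_, ?_⟩
  · intro c d hc hd heq hne
    have hGoodc : pvGood land c := (hM1 c hc).mp hne
    have hGoodd : pvGood land d := (hM1 d hd).mp (by rw [← heq]; exact hne)
    obtain ⟨e, he1, he2, he3⟩ := (hPF.2 c hc).1 hGoodc
    obtain ⟨e', hf1, hf2, hf3⟩ := (hPF.2 d hd).1 hGoodd
    have hee : e = e' := by
      refine id_inj land e e' he1 hf1 ?_
      rw [← he3, ← hf3, heq]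
    rw [hee] at he2
    exact (conn_symm land he2).trans hf2
  · intro c d hconn
    induction hconn with
    | refl => rfl
    | tail hs hadj ihc =>
      rename_i b c'
      exact ihc.trans (hAdjEq b c' hadj)

-- ===== stage 2c helpers =====
lemma countP_cons_mem (a : Int) (S : List Int) (ha : a ∉ S) :
    ∀ L : List Int, L.countP (fun x => decide (x ∈ a :: S)) =
      L.count a + L.countP (fun x => decide (x ∈ S)) := by
  intro L
  induction L with
  | nil => simp
  | cons y L ih =>
    rw [List.countP_cons, List.countP_cons]
    by_cases hy : y = a
    · subst hy
      have h1 : decide (y ∈ y :: S) = true := by simp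
      have h2 : decide (y ∈ S) = false := by simpa using ha
      rw [List.count_cons, ih, h1, h2]
      split_ifs <;> first | omega | simp_all
    · have h1 : decide (y ∈ a :: S) = decide (y ∈ S) := by
        simp [List.mem_cons, hy]
      have h2 : (y == a) = false := by simp [hy]
      rw [List.count_cons, ih, h1, h2]
      split_ifs <;> first | omega | simp_all

lemma sum_count_eq_countP (S : List Int) (L : List Int) (hS : S.Nodup) :
    (S.map (fun l => L.count l)).sum = L.countP (fun x => decide (x ∈ S)) := by
  induction S with
  | nil => simp
  | cons a S ih =>
    rw [List.map_cons, List.sum_cons, countP_cons_mem a S (by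
      intro h
      exact (List.nodup_cons.mp hS).1 h) L, ih (List.nodup_cons.mp hS).2]

lemma row_countP_eq (P Q : Int → Bool) :
    ∀ (r s : List Int), r.length = s.length →
    (∀ k : Nat, k < r.length → P (r.getD k 0) = Q (s.getD k 0)) →
    r.countP P = s.countP Q := by
  intro r
  induction r with
  | nil =>
    intro s hlen _
    cases s with
    | nil => rfl
    | cons y ys => simp at hlen
  | cons x xs ih =>
    intro s hlen hk
    cases s with
    | nil => simp at hlen
    | cons y ys =>
      rw [List.countP_cons, List.countP_cons]
      have h0 := hk 0 (by simp)
      simp only [List.getD_cons_zero] at h0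
      rw [h0, ih ys (by simpa using hlen) (fun k h => by
        simpa using hk (k + 1) (by simpa using Nat.succ_lt_succ h))]

lemma flatten_countP_eq (P Q : Int → Bool) :
    ∀ (V F : List (List Int)), V.length = F.length →
    (∀ i : Nat, i < V.length → (V.getD i []).length = (F.getD i []).length) →
    (∀ i k : Nat, i < V.length → k < (V.getD i []).length →
      P ((V.getD i []).getD k 0) = Q ((F.getD i []).getD k 0)) →
    V.flatten.countP P = F.flatten.countP Q := by
  intro V
  induction V with
  | nil =>
    intro F hlen _ _
    cases F with
    | nil => rfl
    | cons s srest => simp at hlen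
  | cons r rest ih =>
    intro F hlen hrow hcell
    cases F with
    | nil => simp at hlen
    | cons s srest =>
      rw [List.flatten_cons, List.flatten_cons, List.countP_append, List.countP_append]
      have h0 : r.countP P = s.countP Q := by
        refine row_countP_eq P Q r s (by simpa using hrow 0 (by simp)) ?_
        intro k hkr
        simpa using hcell 0 k (by simp) (by simpa using hkr)
      have ht : rest.flatten.countP P = srest.flatten.countP Q := by
        refine ih srest (by simpa using hlen) ?_ ?_
        · intro i h
          simpa using hrow (i + 1) (by simpa using Nat.succ_lt_succ h)
        · intro i k hi hk
          simpa using hcell (i + 1) k (by simpa using Nat.succ_lt_succ hi) (by simpa using hk)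
      omega

-- a label occurs in column j iff the cell lies in a component touching column j
lemma cell_pred (land M : List (List Int)) (hM : pvLabels land M) (j : Int)
    (hj : 0 ≤ j) (hj2 : j < (pvW land : Int)) (c : Int × Int) (hc : pvInb land c) :
    ((∃ i', 0 ≤ i' ∧ i' < (land.length : Int) ∧ pvGet2 M i' j = pvGet2 M c.1 c.2) ∧
        pvGet2 M c.1 c.2 ≠ 0) ↔
      (pvGood land c ∧ ∃ i', pvInb land (i', j) ∧ pvGood land (i', j) ∧
        pvConn land (i', j) c) := by
  obtain ⟨hD, hM1, hM2, hM3⟩ := hM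
  constructor
  · rintro ⟨⟨i', h1, h2, h3⟩, hne⟩
    have hinb' : pvInb land (i', j) := ⟨h1, h2, hj, hj2⟩
    have hGoodc : pvGood land c := (hM1 c hc).mp hne
    have hne' : pvGet2 M i' j ≠ 0 := by rw [h3]; exact hne
    have hGood' : pvGood land (i', j) := (hM1 (i', j) hinb').mp hne'
    have hconn : pvConn land (i', j) c := hM2 (i', j) c hinb' hc h3 hne'
    exact ⟨hGoodc, i', hinb', hGood', hconn⟩
  · rintro ⟨hGoodc, i', hinb', hGood', hconn⟩
    refine ⟨⟨i', hinb'.1, hinb'.2.1, hM3 (i', j) c hconn⟩, (hM1 c hc).mpr hGoodc⟩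

-- ===== stage 2c: two component labelings give the same per-column sums =====
lemma labels_answer_eq (land V F : List (List Int)) (hV : pvLabels land V)
    (hF : pvLabels land F) (j : Int) (hj : 0 ≤ j) (hj2 : j < (pvW land : Int)) :
    (((PySem.Set.ofList ((PySem.List.pyRange 0 (PySem.List.len land) 1).map
        (fun i => pvGet2 V i j))).filter (fun l => l != 0)).map
      (fun l => PySem.Dict.getD (PySem.Dict.counter V.flatten) l 0)).sum =
    ((PySem.Set.diff
        (PySem.Set.ofList ((PySem.List.pyRange 0 (PySem.List.len land) 1).map
          (fun i => pvGet2 F i j)))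
        (PySem.Set.ofList [(0 : Int)])).map
      (fun l => PySem.Dict.getD (PySem.Dict.counter F.flatten) l 0)).sum := by
  set SV := ((PySem.Set.ofList ((PySem.List.pyRange 0 (PySem.List.len land) 1).map
    (fun i => pvGet2 V i j))).filter (fun l => l != 0)) with hSVdef
  set SF := (PySem.Set.diff
    (PySem.Set.ofList ((PySem.List.pyRange 0 (PySem.List.len land) 1).map
      (fun i => pvGet2 F i j)))
    (PySem.Set.ofList [(0 : Int)])) with hSFdef
  have hnV : SV.Nodup := (PySem.Set.nodup_ofList _).filter _
  have hnF : SF.Nodup := PySem.Set.nodup_diff _ _ (PySem.Set.nodup_ofList _)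
  have hSV : ∀ x : Int, x ∈ SV ↔
      ((∃ i', 0 ≤ i' ∧ i' < (land.length : Int) ∧ pvGet2 V i' j = x) ∧ x ≠ 0) := by
    intro x
    rw [hSVdef]
    simp only [List.mem_filter, PySem.Set.mem_ofList, List.mem_map,
      PySem.List.mem_pyRange_one, PySem.List.len_eq, bne_iff_ne]
    constructor
    · rintro ⟨⟨i', ⟨h1, h2⟩, h3⟩, h4⟩
      exact ⟨⟨i', h1, h2, h3⟩, h4⟩
    · rintro ⟨⟨i', h1, h2, h3⟩, h4⟩
      exact ⟨⟨i', ⟨h1, h2⟩, h3⟩, h4⟩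
  have hSF : ∀ x : Int, x ∈ SF ↔
      ((∃ i', 0 ≤ i' ∧ i' < (land.length : Int) ∧ pvGet2 F i' j = x) ∧ x ≠ 0) := by
    intro x
    rw [hSFdef]
    rw [PySem.Set.mem_diff]
    simp only [PySem.Set.mem_ofList, List.mem_map, PySem.List.mem_pyRange_one,
      PySem.List.len_eq, List.mem_singleton]
    constructor
    · rintro ⟨⟨i', ⟨h1, h2⟩, h3⟩, h4⟩
      exact ⟨⟨i', h1, h2, h3⟩, h4⟩
    · rintro ⟨⟨i', h1, h2, h3⟩, h4⟩
      exact ⟨⟨i', ⟨h1, h2⟩, h3⟩, h4⟩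
  have e1 : (SV.map (fun l => PySem.Dict.getD (PySem.Dict.counter V.flatten) l 0)).sum =
      ((V.flatten.countP (fun x => decide (x ∈ SV)) : Nat) : Int) := by
    rw [List.map_congr_left (fun l (_ : l ∈ SV) =>
      PySem.Dict.getD_counter (xs := V.flatten) (v := l))]
    have hmm : SV.map (fun l => ((V.flatten.count l : Nat) : Int)) =
        (SV.map (fun l => V.flatten.count l)).map (fun n : Nat => (n : Int)) := by
      rw [List.map_map]; rfl
    rw [hmm, ← Nat.cast_list_sum, sum_count_eq_countP SV V.flatten hnV]
  have e2 : (SF.map (fun l => PySem.Dict.getD (PySem.Dict.counter F.flatten) l 0)).sum =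
      ((F.flatten.countP (fun x => decide (x ∈ SF)) : Nat) : Int) := by
    rw [List.map_congr_left (fun l (_ : l ∈ SF) =>
      PySem.Dict.getD_counter (xs := F.flatten) (v := l))]
    have hmm : SF.map (fun l => ((F.flatten.count l : Nat) : Int)) =
        (SF.map (fun l => F.flatten.count l)).map (fun n : Nat => (n : Int)) := by
      rw [List.map_map]; rfl
    rw [hmm, ← Nat.cast_list_sum, sum_count_eq_countP SF F.flatten hnF]
  have ecount : V.flatten.countP (fun x => decide (x ∈ SV)) =
      F.flatten.countP (fun x => decide (x ∈ SF)) := by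
    have hlen : V.length = F.length := by rw [hV.1.1, hF.1.1]
    refine flatten_countP_eq _ _ V F hlen ?_ ?_
    · intro i hi
      rw [List.getD_eq_getElem V [] hi, List.getD_eq_getElem F [] (by omega)]
      rw [hV.1.2 _ (List.getElem_mem hi), hF.1.2 _ (List.getElem_mem (by omega))]
    · intro i k hi hk
      have hVlen := hV.1.1
      have hrowlen : (V.getD i []).length = pvW land := by
        rw [List.getD_eq_getElem V [] hi]
        exact hV.1.2 _ (List.getElem_mem hi)
      have hinb : pvInb land ((i : Int), (k : Int)) :=
        ⟨by omega, by omega, by omega, by omega⟩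
      rw [← get2_natCast V i k, ← get2_natCast F i k]
      refine decide_eq_decide.mpr ?_
      rw [hSV _, hSF _]
      exact (cell_pred land V hV j hj hj2 ((i : Int), (k : Int)) hinb).trans
        (cell_pred land F hF j hj hj2 ((i : Int), (k : Int)) hinb).symm
  rw [e1, e2, ecount]

lemma pvMid_eq_alt (land : List (List Int)) : pvMid land = solution_alt land := by
  simp only [pvMid, solution_alt]
  rw [PySem.List.foldl_append_singleton_eq_map, PySem.List.foldl_append_singleton_eq_map]
  simp only [List.nil_append]
  refine congrArg (fun l => (PySem.List.max? l (fun v => v)).getD 0) ?_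
  refine List.map_congr_left ?_
  intro j hj
  rw [PySem.List.len_eq] at hj
  have hb := PySem.List.mem_pyRange_one.mp hj
  exact labels_answer_eq land _ _ (mid_labels land) (prop_labels land) j hb.1
    (by unfold pvW; exact hb.2)

-- ===== VERDICT (by name: the statement is the Claim_ definition above) =====
theorem solution_spec : Claim_equal_solution := by
  unfold Claim_equal_solution
  intro land _ _
  unfold Spec_solution
  rw [solution_eq_pvMid, pvMid_eq_alt]
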